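-- pv_equiv track=rewrite | github.com/Samalot/Algorithms-and-Data-Structures | Compression/Huffman.py | codebook
-- ===== SOURCE A (Python) =====
-- import heapq
--
-- def codebook(data):
--
--     ## Create a frequency heap
--     freq = {}
--     for c in data:
--         freq[c] = freq.get(c, 0) + 1
--
--     ## Create a heap from the frequencies (inverted values to it becomes a max heap)
--     heap = [ (freq[c], c) for c in freq ]
--     heapq.heapify(heap)
--
--     ## Construct a binary tree using the heap.
--     tree = {}
--     while len(heap) > 1:
--         a = heapq.heappop(heap)
--         b = heapq.heappop(heap)
--
--         tree[a[1]] = ( 0, a[1]+b[1] )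
--         tree[b[1]] = ( 1, a[1]+b[1] )
--
--         heapq.heappush( heap, ( a[0]+b[0], a[1]+b[1] ) )
--
--     ## Build the codebook by tracing the tree for each char.
--     codebook = {}
--     for c in freq:
--
--         code = ""
--         pointer = c
--         while pointer in tree:
--             code = str(tree[pointer][0]) + code
--             pointer = tree[pointer][1]
--
--         codebook[c] = code
--
--     return codebook
-- ===== SOURCE B (Python) =====
-- def _insort(nodes, item):
--     i = 0
--     while i < len(nodes) and not item < nodes[i]:
--         i += 1
--     nodes.insert(i, item)
--
-- def codebook(data):
--     # Alternative: an insertion-sorted work list replaces the binary heap, and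
--     # codes are built directly during the merges by prefixing one bit to every
--     # symbol of each merged node (no parent-pointer tree, no upward trace).
--     freq = {}
--     for c in data:
--         freq[c] = freq.get(c, 0) + 1
--
--     nodes = []
--     for c in freq:
--         _insort(nodes, (freq[c], c))
--
--     codes = {c: "" for c in freq}
--     while len(nodes) > 1:
--         a = nodes.pop(0)
--         b = nodes.pop(0)
--         for ch in a[1]:
--             codes[ch] = "0" + codes[ch]
--         for ch in b[1]:
--             codes[ch] = "1" + codes[ch]
--         _insort(nodes, (a[0] + b[0], a[1] + b[1]))
--     return codes
-- ===== Notes on version B (the rewrite author's own statement) =====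
-- stated objective: alternative
-- what changed: B replaces the binary heap by an insertion-sorted work list (linear-scan insort, pop the two smallest from the front) and drops A's parent-pointer tree and per-character upward trace: codes are built during the merges by prefixing one bit to every symbol of each merged node.
import Mathlib
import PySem

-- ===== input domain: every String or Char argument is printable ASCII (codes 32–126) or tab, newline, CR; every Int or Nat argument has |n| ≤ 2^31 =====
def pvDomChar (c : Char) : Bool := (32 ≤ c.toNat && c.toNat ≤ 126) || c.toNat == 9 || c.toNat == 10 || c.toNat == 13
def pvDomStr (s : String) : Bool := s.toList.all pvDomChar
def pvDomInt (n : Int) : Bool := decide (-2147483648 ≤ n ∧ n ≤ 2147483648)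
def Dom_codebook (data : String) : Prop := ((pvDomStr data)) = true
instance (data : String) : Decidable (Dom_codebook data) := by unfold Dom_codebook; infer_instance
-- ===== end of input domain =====

-- B replaces A's binary heap by an insertion-sorted work list (linear-scan insort, pop the two
-- smallest from the front) and drops A's parent-pointer tree and per-character upward trace:
-- codes are built during the merges by prefixing one bit to every symbol of each merged node.

-- ===== PORT A =====
-- A-side helpers: a step-for-step transliteration of CPython's heapq (_siftdown, _siftup,
-- heapify, heappush, heappop), exactly as A calls heapq.

-- Python string comparison s < t: lexicographic by code point (hand-ported, exact;
-- written on List Char so the kernel can evaluate it).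
def chLt (a b : List Char) : Bool :=
  match a, b with
  | [], [] => false
  | [], _ :: _ => true
  | _ :: _, [] => false
  | x :: xs, y :: ys => x.toNat < y.toNat || (x == y && chLt xs ys)

-- Python tuple comparison (freq, symbol) < (freq', symbol'): lexicographic Int then str.
def pyLt (a b : Int × String) : Bool :=
  decide (a.1 < b.1) || (a.1 == b.1 && chLt a.2.toList b.2.toList)

-- heap[i]; every access in heapq is in range, so the default is never read.
def hpGet (h : Array (Int × String)) (i : Nat) : Int × String := h.getD i (0, "")

-- heapq._siftdown's while loop; returns (heap, final pos).
-- (fuel-structural recursion so the kernel can evaluate it; pos strictly decreases each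
-- iteration, so initial fuel = pos always suffices and the 0-fuel branch is unreachable.)
def siftdownLoop (fuel : Nat) (heap : Array (Int × String)) (startpos pos : Nat)
    (newitem : Int × String) : Array (Int × String) × Nat :=
  match fuel with
  | 0 => (heap, pos)
  | fuel + 1 =>
    if startpos < pos then
      let parentpos := (pos - 1) / 2
      let parent := hpGet heap parentpos
      if pyLt newitem parent then
        siftdownLoop fuel (heap.set! pos parent) startpos parentpos newitem
      else (heap, pos)
    else (heap, pos)

-- heapq._siftdown(heap, startpos, pos)
def siftdown (heap : Array (Int × String)) (startpos pos : Nat) : Array (Int × String) :=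
  let newitem := hpGet heap pos
  let r := siftdownLoop pos heap startpos pos newitem
  r.1.set! r.2 newitem

-- the childpos correction inside _siftup's loop (rightpos branch)
def pickChild (heap : Array (Int × String)) (endpos childpos : Nat) : Nat :=
  if childpos + 1 < endpos && !(pyLt (hpGet heap childpos) (hpGet heap (childpos + 1)))
  then childpos + 1 else childpos

-- heapq._siftup's while loop; returns (heap, final pos).
-- (childpos strictly increases each iteration, so initial fuel = endpos suffices.)
def siftupLoop (fuel : Nat) (heap : Array (Int × String)) (endpos pos childpos : Nat) :
    Array (Int × String) × Nat :=
  match fuel with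
  | 0 => (heap, pos)
  | fuel + 1 =>
    if childpos < endpos then
      let c2 := pickChild heap endpos childpos
      siftupLoop fuel (heap.set! pos (hpGet heap c2)) endpos c2 (2 * c2 + 1)
    else (heap, pos)

-- heapq._siftup(heap, pos)
def siftup (heap : Array (Int × String)) (pos : Nat) : Array (Int × String) :=
  let endpos := heap.size
  let newitem := hpGet heap pos
  let r := siftupLoop endpos heap endpos pos (2 * pos + 1)
  siftdown (r.1.set! r.2 newitem) pos r.2

-- heapq.heapify
def heapify (heap : Array (Int × String)) : Array (Int × String) :=
  (List.range (heap.size / 2)).reverse.foldl (fun h i => siftup h i) heap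

-- heapq.heappush
def heappush (heap : Array (Int × String)) (item : Int × String) : Array (Int × String) :=
  let heap := heap.push item
  siftdown heap 0 (heap.size - 1)

-- heapq.heappop (callers only pop nonempty heaps; the default of hpGet is never read)
def heappop (heap : Array (Int × String)) : (Int × String) × Array (Int × String) :=
  let lastelt := hpGet heap (heap.size - 1)
  let heap := heap.pop
  if heap.size ≠ 0 then
    let returnitem := hpGet heap 0
    (returnitem, siftup (heap.set! 0 lastelt) 0)
  else
    (lastelt, heap)

-- the while len(heap) > 1 merge loop of A, building the parent-pointer tree
-- (each iteration shrinks the heap by one, so fuel = heap.size suffices)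
def mergeA (fuel : Nat) (heap : Array (Int × String))
    (tree : PySem.Dict String (Int × String)) : PySem.Dict String (Int × String) :=
  match fuel with
  | 0 => tree
  | fuel + 1 =>
    if 1 < heap.size then
      let pa := heappop heap
      let pb := heappop pa.2
      let a := pa.1
      let b := pb.1
      let tree := (tree.insert a.2 (0, a.2 ++ b.2)).insert b.2 (1, a.2 ++ b.2)
      mergeA fuel (heappush pb.2 (a.1 + b.1, a.2 ++ b.2)) tree
    else tree

-- A's upward trace: while pointer in tree: code = str(bit) + code; pointer = parent.
-- Fuel tree.size+1 always suffices (key lengths strictly grow along a chain; proved below).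
def traceAux (fuel : Nat) (tree : PySem.Dict String (Int × String)) (p code : String) :
    String :=
  match fuel with
  | 0 => code
  | fuel + 1 =>
    match tree.get? p with
    | some (bit, q) => traceAux fuel tree q (PySem.Int.toStr bit ++ code)
    | none => code

def codebook (data : String) : List (String × String) :=
  let freq : PySem.Dict String Int :=
    data.toList.foldl
      (fun d c => d.insert (String.singleton c) (d.getD (String.singleton c) 0 + 1))
      PySem.Dict.empty
  let heap := heapify ((freq.keys.map (fun c => (freq.getD c 0, c))).toArray)
  let tree := mergeA heap.size heap PySem.Dict.empty
  let cb := freq.keys.foldl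
      (fun cb c => cb.insert c (traceAux (tree.size + 1) tree c ""))
      (PySem.Dict.empty : PySem.Dict String String)
  cb.items

-- ===== PORT B =====
-- B-side helper: _insort's linear scan — walk past every element the new item is not
-- smaller than, insert there (Source B's while loop, as recursion on the list).
def insort (item : Int × String) (nodes : List (Int × String)) : List (Int × String) :=
  match nodes with
  | [] => [item]
  | y :: ys => if pyLt item y then item :: y :: ys else y :: insort item ys

-- B's merge loop over the sorted work list: pop the two front nodes, prefix one bit to the
-- code of every symbol of each, insort the merged node.  Fuel = list length suffices
-- (each iteration shortens the list by one).
def mergeB (fuel : Nat) (nodes : List (Int × String))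
    (codes : PySem.Dict String String) : PySem.Dict String String :=
  match fuel with
  | 0 => codes
  | fuel + 1 =>
    match nodes with
    | a :: b :: rest =>
      let codes := a.2.toList.foldl
        (fun k ch => k.insert (String.singleton ch) ("0" ++ k.getD (String.singleton ch) ""))
        codes
      let codes := b.2.toList.foldl
        (fun k ch => k.insert (String.singleton ch) ("1" ++ k.getD (String.singleton ch) ""))
        codes
      mergeB fuel (insort (a.1 + b.1, a.2 ++ b.2) rest) codes
    | _ => codes

def codebook_alt (data : String) : List (String × String) :=
  let freq : PySem.Dict String Int :=
    data.toList.foldl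
      (fun d c => d.insert (String.singleton c) (d.getD (String.singleton c) 0 + 1))
      PySem.Dict.empty
  let nodes := freq.keys.foldl (fun ns c => insort (freq.getD c 0, c) ns) []
  let codes := freq.keys.foldl (fun k c => k.insert c "")
      (PySem.Dict.empty : PySem.Dict String String)
  (mergeB nodes.length nodes codes).items

-- ===== PRECONDITION & SPEC =====
def Spec_codebook (data : String) (out : List (String × String)) : Prop := out = codebook_alt data
instance (data : String) (out : List (String × String)) : Decidable (Spec_codebook data out) := by unfold Spec_codebook; infer_instance

-- ===== CLAIM (what is proved, stated in full; the proofs are below) =====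
def Claim_equal_codebook : Prop := ∀ (data : String), Dom_codebook data → Spec_codebook data (codebook data)

-- ===== LEMMAS AND PROOFS =====

-- ---------- the order pyLt: a strict total order on (Int × String) ----------

theorem chLt_irrefl (a : List Char) : chLt a a = false := by
  induction a with
  | nil => rfl
  | cons x xs ih => simp [chLt, ih]

theorem chLt_trans : ∀ (a b c : List Char), chLt a b = true → chLt b c = true →
    chLt a c = true := by
  intro a
  induction a with
  | nil =>
    intro b c h1 h2
    cases b with
    | nil => simp [chLt] at h1
    | cons y ys =>
      cases c with
      | nil => simp [chLt] at h2
      | cons z zs => simp [chLt]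
  | cons x xs ih =>
    intro b c h1 h2
    cases b with
    | nil => simp [chLt] at h1
    | cons y ys =>
      cases c with
      | nil => simp [chLt] at h2
      | cons z zs =>
        simp only [chLt, Bool.or_eq_true, Bool.and_eq_true, decide_eq_true_eq,
          beq_iff_eq] at h1 h2 ⊢
        rcases h1 with h1 | ⟨rfl, h1⟩
        · rcases h2 with h2 | ⟨rfl, h2⟩
          · left; omega
          · left; exact h1
        · rcases h2 with h2 | ⟨rfl, h2⟩
          · left; exact h2
          · right; exact ⟨rfl, ih ys zs h1 h2⟩

theorem chLt_antisymm : ∀ (a b : List Char), chLt a b = false → chLt b a = false →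
    a = b := by
  intro a
  induction a with
  | nil =>
    intro b h1 h2
    cases b with
    | nil => rfl
    | cons y ys => simp [chLt] at h1
  | cons x xs ih =>
    intro b h1 h2
    cases b with
    | nil => simp [chLt] at h2
    | cons y ys =>
      simp only [chLt, Bool.or_eq_false_iff, decide_eq_false_iff_not] at h1 h2
      obtain ⟨hn1, hb1⟩ := h1
      obtain ⟨hn2, hb2⟩ := h2
      have hxy : x = y := by
        have hnat : x.toNat = y.toNat := by omega
        have hv : x.val = y.val := by
          apply UInt32.toNat_inj.mp; exact hnat
        exact Char.ext hv
      subst hxy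
      simp only [beq_self_eq_true, Bool.true_and] at hb1 hb2
      rw [ih ys hb1 hb2]

theorem pyLt_irrefl (a : Int × String) : pyLt a a = false := by
  simp [pyLt, chLt_irrefl]

theorem pyLt_trans (a b c : Int × String) (h1 : pyLt a b = true) (h2 : pyLt b c = true) :
    pyLt a c = true := by
  simp only [pyLt, Bool.or_eq_true, Bool.and_eq_true, decide_eq_true_eq, beq_iff_eq] at h1 h2 ⊢
  rcases h1 with h1 | ⟨he1, h1⟩
  · rcases h2 with h2 | ⟨he2, h2⟩
    · left; omega
    · left; omega
  · rcases h2 with h2 | ⟨he2, h2⟩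
    · left; omega
    · right; exact ⟨by omega, chLt_trans _ _ _ h1 h2⟩

theorem pyLt_antisymm (a b : Int × String) (h1 : pyLt a b = false) (h2 : pyLt b a = false) :
    a = b := by
  simp only [pyLt, Bool.or_eq_false_iff, decide_eq_false_iff_not] at h1 h2
  obtain ⟨hn1, hb1⟩ := h1
  obtain ⟨hn2, hb2⟩ := h2
  have he : a.1 = b.1 := by omega
  have hc1 : chLt a.2.toList b.2.toList = false := by simpa [he] using hb1
  have hc2 : chLt b.2.toList a.2.toList = false := by simpa [he] using hb2
  have h2s : a.2 = b.2 := String.toList_inj.mp (chLt_antisymm _ _ hc1 hc2)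
  exact Prod.ext he h2s

theorem pyLt_asymm (a b : Int × String) (h : pyLt a b = true) : pyLt b a = false := by
  by_contra hc
  have hba : pyLt b a = true := by revert hc; cases pyLt b a <;> simp
  have := pyLt_trans a b a h hba
  rw [pyLt_irrefl] at this
  cases this

theorem pyLe_trans (a b c : Int × String) (h1 : pyLt b a = false) (h2 : pyLt c b = false) :
    pyLt c a = false := by
  by_contra hc
  have hca : pyLt c a = true := by revert hc; cases pyLt c a <;> simp
  by_cases hcb : c = b
  · subst hcb; rw [hca] at h1; cases h1
  · have hbc : pyLt b c = true := by
      by_contra hbc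
      have hbc' : pyLt b c = false := by revert hbc; cases pyLt b c <;> simp
      exact hcb (pyLt_antisymm c b h2 hbc')
    have := pyLt_trans b c a hbc hca
    rw [this] at h1; cases h1

-- ---------- small array-access lemmas ----------

theorem hpGet_eq_getElem (h : Array (Int × String)) (i : Nat) (hi : i < h.size) :
    hpGet h i = h[i] := by
  simp [hpGet, Array.getD, hi]

theorem getElem_eq_toList {α : Type} (a : Array α) (i : Nat) (hi : i < a.size) :
    a[i] = a.toList[i]'(by simpa using hi) := by
  simp [Array.getElem_toList]

theorem hpGet_set_self (h : Array (Int × String)) (i : Nat) (v : Int × String)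
    (hi : i < h.size) : hpGet (h.set! i v) i = v := by
  simp [hpGet, Array.set!, Array.getD, hi]

theorem hpGet_set_ne (h : Array (Int × String)) (i j : Nat) (v : Int × String)
    (hij : j ≠ i) : hpGet (h.set! i v) j = hpGet h j := by
  by_cases hj : j < h.size
  · rw [hpGet_eq_getElem _ _ (by simpa [Array.set!] using hj), hpGet_eq_getElem _ _ hj]
    simp only [Array.set!]
    exact Array.getElem_setIfInBounds_ne hj (fun he => hij he.symm)
  · simp [hpGet, Array.set!, Array.getD, hj]

theorem hpGet_push_lt (h : Array (Int × String)) (v : Int × String) (i : Nat)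
    (hi : i < h.size) : hpGet (h.push v) i = hpGet h i := by
  rw [hpGet_eq_getElem _ _ (by simp; omega), hpGet_eq_getElem _ _ hi]
  exact Array.getElem_push_lt hi

theorem hpGet_pop (h : Array (Int × String)) (i : Nat) (hi : i < h.size - 1) :
    hpGet h.pop i = hpGet h i := by
  have h1 : i < h.pop.size := by simp; omega
  have h2 : i < h.size := by omega
  rw [hpGet_eq_getElem _ _ h1, hpGet_eq_getElem _ _ h2]
  simp [Array.getElem_pop]

theorem mem_toList_hpGet (h : Array (Int × String)) (x : Int × String)
    (hx : x ∈ h.toList) : ∃ i, i < h.size ∧ hpGet h i = x := by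
  obtain ⟨i, hi, he⟩ := List.getElem_of_mem hx
  exact ⟨i, by simpa using hi, by rw [hpGet_eq_getElem h i (by simpa using hi),
    getElem_eq_toList h i (by simpa using hi)]; exact he⟩

-- ---------- heap multiset facts ----------

theorem le_pickChild (heap : Array (Int × String)) (endpos childpos : Nat) :
    childpos ≤ pickChild heap endpos childpos := by
  unfold pickChild; split <;> omega

theorem size_siftdownLoop (fuel : Nat) (heap : Array (Int × String)) (startpos pos : Nat)
    (newitem : Int × String) : (siftdownLoop fuel heap startpos pos newitem).1.size = heap.size := by
  fun_induction siftdownLoop <;> simp_all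

theorem size_siftdown (heap : Array (Int × String)) (startpos pos : Nat) :
    (siftdown heap startpos pos).size = heap.size := by
  simp [siftdown, size_siftdownLoop]

theorem size_siftupLoop (fuel : Nat) (heap : Array (Int × String)) (endpos pos childpos : Nat) :
    (siftupLoop fuel heap endpos pos childpos).1.size = heap.size := by
  fun_induction siftupLoop <;> simp_all

theorem size_siftup (heap : Array (Int × String)) (pos : Nat) :
    (siftup heap pos).size = heap.size := by
  simp [siftup, size_siftdown, size_siftupLoop]

theorem size_heappush (heap : Array (Int × String)) (item : Int × String) :
    (heappush heap item).size = heap.size + 1 := by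
  simp [heappush, size_siftdown]

theorem size_heappop (heap : Array (Int × String)) :
    (heappop heap).2.size = heap.size - 1 := by
  unfold heappop
  by_cases h : heap.size - 1 = 0 <;> simp [h, size_siftup]

-- replacing t[m] by v is, up to permutation, removing t[m] and consing v
theorem consSetPerm {α : Type} (t : List α) (m : Nat) (v : α) (h : m < t.length) :
    (t[m] :: t.set m v).Perm (v :: t) := by
  induction t generalizing m with
  | nil => simp at h
  | cons a r ih =>
    cases m with
    | zero => simpa using List.Perm.swap v a r
    | succ m =>
      have h' : m < r.length := by simpa using h
      simp only [List.getElem_cons_succ, List.set_cons_succ]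
      exact (List.Perm.swap a (r[m]'h') _).trans
        ((List.Perm.cons a (ih m h')).trans (List.Perm.swap v a r))

theorem setSetPerm {α : Type} (l : List α) (i j : Nat) (v : α)
    (hi : i < l.length) (hj : j < l.length) (hij : i ≠ j) :
    ((l.set i (l[j])).set j v).Perm (l.set i v) := by
  induction l generalizing i j with
  | nil => simp at hi
  | cons a r ih =>
    cases i with
    | zero =>
      cases j with
      | zero => exact absurd rfl hij
      | succ m =>
        simp only [List.getElem_cons_succ, List.set_cons_zero, List.set_cons_succ]
        exact consSetPerm r m v (by simpa using hj)
    | succ n =>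
      cases j with
      | zero =>
        simp only [List.getElem_cons_zero, List.set_cons_succ, List.set_cons_zero]
        have hn : n < r.length := by simpa using hi
        have h1 := consSetPerm (r.set n a) n v (by simpa using hn)
        rw [List.set_set, List.getElem_set_self (by simpa using hn)] at h1
        exact h1.symm
      | succ m =>
        simp only [List.getElem_cons_succ, List.set_cons_succ]
        exact List.Perm.cons a (ih n m (by simpa using hi) (by simpa using hj) (by omega))

theorem siftdownLoop_spec (fuel : Nat) (heap : Array (Int × String)) (startpos pos : Nat)
    (newitem : Int × String) :
    pos < heap.size →
    (siftdownLoop fuel heap startpos pos newitem).2 < heap.size ∧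
    ((siftdownLoop fuel heap startpos pos newitem).1.setIfInBounds
        (siftdownLoop fuel heap startpos pos newitem).2 newitem).toList.Perm
      ((heap.setIfInBounds pos newitem).toList) := by
  fun_induction siftdownLoop with
  | case1 heap pos =>
    intro h; exact ⟨h, List.Perm.refl _⟩
  | case2 heap pos fuel hsp parentpos parent hlt ih =>
    intro h
    have hpp : parentpos < pos := by simp only [parentpos]; omega
    have h2 : parentpos < (heap.set! pos parent).size := by simp [Array.set!]; omega
    obtain ⟨ih1, ih2⟩ := ih h2
    refine ⟨by simpa [Array.set!] using ih1, ?_⟩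
    simp only [Array.set!] at ih2
    refine ih2.trans ?_
    simp only [Array.toList_setIfInBounds]
    rw [show parent = heap.toList[parentpos]'(by simpa using (by omega : parentpos < heap.size)) from by
      rw [show parent = hpGet heap parentpos from rfl, hpGet_eq_getElem heap parentpos (by omega)]
      exact getElem_eq_toList heap parentpos (by omega)]
    exact setSetPerm heap.toList pos parentpos newitem (by simpa using h)
      (by simpa using (by omega : parentpos < heap.size)) (by omega)
  | case3 heap pos fuel hsp parentpos parent hlt =>
    intro h; exact ⟨h, List.Perm.refl _⟩
  | case4 heap pos fuel hsp =>
    intro h; exact ⟨h, List.Perm.refl _⟩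

theorem siftdown_perm (heap : Array (Int × String)) (startpos pos : Nat)
    (h : pos < heap.size) : (siftdown heap startpos pos).toList.Perm heap.toList := by
  unfold siftdown
  obtain ⟨h1, h2⟩ := siftdownLoop_spec pos heap startpos pos (hpGet heap pos) h
  simp only [Array.set!] at h2 ⊢
  refine h2.trans ?_
  rw [hpGet_eq_getElem heap pos h]
  simp only [Array.toList_setIfInBounds]
  rw [getElem_eq_toList heap pos h, List.set_getElem_self]

theorem pickChild_lt (heap : Array (Int × String)) (endpos childpos : Nat)
    (h : childpos < endpos) : pickChild heap endpos childpos < endpos := by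
  unfold pickChild; split <;> rename_i hc
  · simp only [Bool.and_eq_true, decide_eq_true_eq] at hc; omega
  · omega

theorem siftupLoop_spec (fuel : Nat) (heap : Array (Int × String)) (endpos pos childpos : Nat)
    (newitem : Int × String) :
    endpos = heap.size → pos < heap.size → pos < childpos →
    (siftupLoop fuel heap endpos pos childpos).2 < heap.size ∧
    ((siftupLoop fuel heap endpos pos childpos).1.setIfInBounds
        (siftupLoop fuel heap endpos pos childpos).2 newitem).toList.Perm
      ((heap.setIfInBounds pos newitem).toList) := by
  fun_induction siftupLoop with
  | case1 heap pos childpos =>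
    intro he hp hpc; exact ⟨hp, List.Perm.refl _⟩
  | case2 heap pos childpos fuel hce c2 ih =>
    intro he hp hpc
    have hc2 : c2 < heap.size := by
      rw [← he]; exact pickChild_lt heap endpos childpos hce
    have hcc : childpos ≤ c2 := le_pickChild heap endpos childpos
    have h2 : c2 < (heap.set! pos (hpGet heap c2)).size := by simpa [Array.set!] using hc2
    obtain ⟨ih1, ih2⟩ := ih (by simpa [Array.set!] using he) h2 (by omega)
    refine ⟨by simpa [Array.set!] using ih1, ?_⟩
    simp only [Array.set!] at ih2
    refine ih2.trans ?_
    simp only [Array.toList_setIfInBounds]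
    rw [hpGet_eq_getElem heap _ hc2, getElem_eq_toList heap _ hc2]
    exact setSetPerm heap.toList pos c2 newitem (by simpa using hp) (by simpa using hc2) (by omega)
  | case3 heap pos childpos fuel hce =>
    intro he hp hpc; exact ⟨hp, List.Perm.refl _⟩

theorem siftup_perm (heap : Array (Int × String)) (pos : Nat) (h : pos < heap.size) :
    (siftup heap pos).toList.Perm heap.toList := by
  unfold siftup
  obtain ⟨h1, h2⟩ := siftupLoop_spec heap.size heap heap.size pos (2 * pos + 1) (hpGet heap pos) rfl h (by omega)
  have hs : ((siftupLoop heap.size heap heap.size pos (2 * pos + 1)).1.set!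
      (siftupLoop heap.size heap heap.size pos (2 * pos + 1)).2 (hpGet heap pos)).size = heap.size := by
    simp [Array.set!, size_siftupLoop]
  refine (siftdown_perm _ pos _ (by rw [hs]; exact h1)).trans ?_
  simp only [Array.set!] at h2 ⊢
  refine h2.trans ?_
  rw [hpGet_eq_getElem heap pos h]
  simp only [Array.toList_setIfInBounds]
  rw [getElem_eq_toList heap pos h, List.set_getElem_self]

theorem heapify_perm (heap : Array (Int × String)) :
    (heapify heap).toList.Perm heap.toList := by
  unfold heapify
  have key : ∀ (l : List Nat) (h : Array (Int × String)), (∀ i ∈ l, i < h.size) →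
      (l.foldl (fun h i => siftup h i) h).toList.Perm h.toList := by
    intro l
    induction l with
    | nil => intro h _; exact List.Perm.refl _
    | cons x t ih =>
      intro h hb
      have hx : x < h.size := hb x List.mem_cons_self
      have hrest : ∀ i ∈ t, i < (siftup h x).size := by
        intro i hi; rw [size_siftup]; exact hb i (List.mem_cons_of_mem x hi)
      exact (ih (siftup h x) hrest).trans (siftup_perm h x hx)
  refine key _ heap ?_
  intro i hi
  simp only [List.mem_reverse, List.mem_range] at hi
  omega

theorem heappush_perm (heap : Array (Int × String)) (item : Int × String) :
    (heappush heap item).toList.Perm (heap.toList ++ [item]) := by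
  unfold heappush
  refine (siftdown_perm _ 0 _ (by simp)).trans ?_
  simp [Array.toList_push]

theorem heappop_perm (heap : Array (Int × String)) (h : 0 < heap.size) :
    ((heappop heap).1 :: (heappop heap).2.toList).Perm heap.toList := by
  unfold heappop
  have hs1 : heap.size - 1 < heap.size := by omega
  have hlast : hpGet heap (heap.size - 1) = heap.toList[heap.size - 1]'(by simpa using hs1) := by
    rw [hpGet_eq_getElem heap _ hs1]; exact getElem_eq_toList heap _ hs1
  by_cases h0 : heap.pop.size ≠ 0
  · rw [if_pos h0]
    have hps : 0 < heap.pop.size := Nat.pos_of_ne_zero h0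
    have hret : hpGet heap.pop 0 = heap.toList[0]'(by simpa using h) := by
      rw [hpGet_eq_getElem heap.pop 0 hps, getElem_eq_toList heap.pop 0 hps]
      simp [Array.toList_pop, List.getElem_dropLast]
    have hperm := siftup_perm (heap.pop.set! 0 (hpGet heap (heap.size - 1))) 0
      (by simpa [Array.set!] using hps)
    refine (List.Perm.cons _ hperm).trans ?_
    simp only [Array.set!, Array.toList_setIfInBounds, Array.toList_pop, hret, hlast]
    have hne : heap.toList ≠ [] := List.ne_nil_of_length_pos (by simpa using h)
    have hdl : 0 < heap.toList.dropLast.length := by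
      have hp2 : heap.pop.size = heap.size - 1 := Array.size_pop
      have : 2 ≤ heap.size := by omega
      simp only [List.length_dropLast, Array.length_toList]
      omega
    have hF := consSetPerm heap.toList.dropLast 0
      (heap.toList[heap.size - 1]'(by simpa using hs1)) hdl
    have hg : heap.toList.dropLast[0]'hdl = heap.toList[0]'(by simpa using h) := by
      rw [List.getElem_dropLast]
    rw [hg] at hF
    refine hF.trans ?_
    have hlast2 : heap.toList[heap.size - 1]'(by simpa using hs1) = heap.toList.getLast hne := by
      rw [List.getLast_eq_getElem]; simp
    rw [hlast2]
    exact (List.perm_append_singleton _ _).symm.trans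
      (by rw [List.dropLast_concat_getLast hne])
  · rw [if_neg h0]
    have h0' : heap.pop.size = 0 := by omega
    have h1 : heap.size = 1 := by have := Array.size_pop (xs := heap); omega
    have hl : heap.toList.length = 1 := by simpa using h1
    obtain ⟨a, ha⟩ := List.length_eq_one_iff.mp hl
    have hl0 : hpGet heap (heap.size - 1) = a := by
      rw [hlast]; simp [ha]
    simp [Array.toList_pop, ha, hl0]

-- ---------- the heap-order invariant: heapify / heappush / heappop keep it, ----------
-- ---------- and the root of an ordered heap is a minimum                     ----------

-- every parent (index ≥ s) is ≤ its children, in Python's tuple order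
def ParentsOK (h : Array (Int × String)) (s : Nat) : Prop :=
  ∀ c, 0 < c → c < h.size → s ≤ (c - 1) / 2 →
    pyLt (hpGet h c) (hpGet h ((c - 1) / 2)) = false

-- s lies on the parent chain of p
inductive IsAnc (s : Nat) : Nat → Prop
  | refl : IsAnc s s
  | step (p : Nat) (h : 0 < p) (hp : IsAnc s ((p - 1) / 2)) : IsAnc s p

theorem isAnc_le (s p : Nat) (h : IsAnc s p) : s ≤ p := by
  induction h with
  | refl => exact le_refl s
  | step p h hp ih => omega

theorem isAnc_parent (s p : Nat) (h : IsAnc s p) (hlt : s < p) : IsAnc s ((p - 1) / 2) := by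
  cases h with
  | refl => omega
  | step p h hp => exact hp

theorem isAnc_zero (p : Nat) : IsAnc 0 p := by
  induction p using Nat.strong_induction_on with
  | _ p ih =>
    cases p with
    | zero => exact IsAnc.refl
    | succ q => exact IsAnc.step (q + 1) (by omega) (ih _ (by omega))

-- loop-equation lemmas for the two sift loops
theorem siftdownLoop_step (fuel : Nat) (heap : Array (Int × String)) (startpos pos : Nat)
    (newitem : Int × String) (h1 : startpos < pos)
    (h2 : pyLt newitem (hpGet heap ((pos - 1) / 2)) = true) :
    siftdownLoop (fuel + 1) heap startpos pos newitem
      = siftdownLoop fuel (heap.set! pos (hpGet heap ((pos - 1) / 2))) startpos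
          ((pos - 1) / 2) newitem := by
  simp [siftdownLoop, h1, h2]

theorem siftdownLoop_stop (fuel : Nat) (heap : Array (Int × String)) (startpos pos : Nat)
    (newitem : Int × String) (h1 : startpos < pos)
    (h2 : pyLt newitem (hpGet heap ((pos - 1) / 2)) = false) :
    siftdownLoop (fuel + 1) heap startpos pos newitem = (heap, pos) := by
  simp [siftdownLoop, h1, h2]

theorem siftdownLoop_exit (fuel : Nat) (heap : Array (Int × String)) (startpos pos : Nat)
    (newitem : Int × String) (h1 : ¬ startpos < pos) :
    siftdownLoop (fuel + 1) heap startpos pos newitem = (heap, pos) := by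
  simp [siftdownLoop, h1]

theorem siftupLoop_step (fuel : Nat) (heap : Array (Int × String)) (endpos pos childpos : Nat)
    (h : childpos < endpos) :
    siftupLoop (fuel + 1) heap endpos pos childpos
      = siftupLoop fuel (heap.set! pos (hpGet heap (pickChild heap endpos childpos))) endpos
          (pickChild heap endpos childpos) (2 * pickChild heap endpos childpos + 1) := by
  simp [siftupLoop, h]

theorem siftupLoop_exit (fuel : Nat) (heap : Array (Int × String)) (endpos pos childpos : Nat)
    (h : ¬ childpos < endpos) :
    siftupLoop (fuel + 1) heap endpos pos childpos = (heap, pos) := by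
  simp [siftupLoop, h]

theorem pickChild_cases (heap : Array (Int × String)) (endpos childpos : Nat) :
    pickChild heap endpos childpos = childpos ∨
    pickChild heap endpos childpos = childpos + 1 := by
  unfold pickChild; split
  · right; rfl
  · left; rfl

theorem pickChild_min (heap : Array (Int × String)) (endpos childpos d : Nat)
    (hd : d = childpos ∨ d = childpos + 1) (hdlt : d < endpos) :
    pyLt (hpGet heap d) (hpGet heap (pickChild heap endpos childpos)) = false := by
  unfold pickChild
  split
  · rename_i hcond
    simp only [Bool.and_eq_true, decide_eq_true_eq, Bool.not_eq_true'] at hcond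
    rcases hd with rfl | rfl
    · exact hcond.2
    · exact pyLt_irrefl _
  · rename_i hcond
    rcases hd with rfl | rfl
    · exact pyLt_irrefl _
    · simp only [Bool.and_eq_true, decide_eq_true_eq, Bool.not_eq_true', not_and] at hcond
      have hcc := hcond hdlt
      have ht : pyLt (hpGet heap childpos) (hpGet heap (childpos + 1)) = true := by
        cases hx : pyLt (hpGet heap childpos) (hpGet heap (childpos + 1))
        · exact absurd hx hcc
        · rfl
      exact pyLt_asymm _ _ ht

-- placing newitem at pos after the bubble-up loop stops gives a heap from startpos on
theorem place_parents (heap : Array (Int × String)) (startpos pos : Nat)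
    (newitem : Int × String) (hpos : pos < heap.size)
    (J1 : ∀ c, 0 < c → c < heap.size → startpos ≤ (c - 1) / 2 → (c - 1) / 2 ≠ pos → c ≠ pos →
      pyLt (hpGet heap c) (hpGet heap ((c - 1) / 2)) = false)
    (J2 : ∀ c, 0 < c → c < heap.size → (c - 1) / 2 = pos →
      pyLt (hpGet heap c) newitem = false)
    (hstop : pos = startpos ∨ pyLt newitem (hpGet heap ((pos - 1) / 2)) = false) :
    ParentsOK (heap.set! pos newitem) startpos := by
  intro c hc hcs hcp
  have hcs' : c < heap.size := by simpa [Array.set!] using hcs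
  by_cases hcpos : c = pos
  · subst hcpos
    have hpar_ne : (c - 1) / 2 ≠ c := by omega
    rw [hpGet_set_self heap c newitem hcs', hpGet_set_ne heap c _ newitem hpar_ne]
    rcases hstop with he | hstop
    · exfalso; omega
    · exact hstop
  · by_cases hpar : (c - 1) / 2 = pos
    · rw [hpGet_set_ne heap pos c newitem hcpos, hpar, hpGet_set_self heap pos newitem hpos]
      exact J2 c hc hcs' hpar
    · rw [hpGet_set_ne heap pos c newitem hcpos, hpGet_set_ne heap pos _ newitem hpar]
      exact J1 c hc hcs' hcp hpar hcpos

theorem siftdownLoop_parents : ∀ (fuel : Nat) (heap : Array (Int × String))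
    (startpos pos : Nat) (newitem : Int × String),
    pos - startpos ≤ fuel → pos < heap.size → IsAnc startpos pos →
    (∀ c, 0 < c → c < heap.size → startpos ≤ (c - 1) / 2 → (c - 1) / 2 ≠ pos → c ≠ pos →
      pyLt (hpGet heap c) (hpGet heap ((c - 1) / 2)) = false) →
    (∀ c, 0 < c → c < heap.size → (c - 1) / 2 = pos →
      pyLt (hpGet heap c) newitem = false) →
    (startpos < pos → ∀ c, 0 < c → c < heap.size → (c - 1) / 2 = pos →
      pyLt (hpGet heap c) (hpGet heap ((pos - 1) / 2)) = false) →
    ParentsOK ((siftdownLoop fuel heap startpos pos newitem).1.set!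
               (siftdownLoop fuel heap startpos pos newitem).2 newitem) startpos := by
  intro fuel
  induction fuel with
  | zero =>
    intro heap startpos pos newitem hfuel hpos hanc J1 J2 K
    have hle := isAnc_le _ _ hanc
    exact place_parents heap startpos pos newitem hpos J1 J2 (Or.inl (by omega))
  | succ fuel ih =>
    intro heap startpos pos newitem hfuel hpos hanc J1 J2 K
    by_cases hsp : startpos < pos
    · have hple : startpos ≤ (pos - 1) / 2 := isAnc_le _ _ (isAnc_parent _ _ hanc hsp)
      by_cases hlt : pyLt newitem (hpGet heap ((pos - 1) / 2)) = true
      · rw [siftdownLoop_step fuel heap startpos pos newitem hsp hlt]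
        refine ih (heap.set! pos (hpGet heap ((pos - 1) / 2))) startpos ((pos - 1) / 2) newitem
          (by omega) (by simp [Array.set!]; omega) (isAnc_parent _ _ hanc hsp) ?_ ?_ ?_
        · -- J1 for the new state
          intro c hc hcs hcp hcpne hcne
          have hcs' : c < heap.size := by simpa [Array.set!] using hcs
          by_cases hcpos : c = pos
          · exfalso; omega
          · by_cases hparpos : (c - 1) / 2 = pos
            · rw [hpGet_set_ne heap pos c _ hcpos, hparpos,
                hpGet_set_self heap pos _ hpos]
              exact K hsp c hc hcs' hparpos
            · rw [hpGet_set_ne heap pos c _ hcpos, hpGet_set_ne heap pos _ _ hparpos]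
              exact J1 c hc hcs' hcp hparpos hcpos
        · -- J2 for the new state
          intro c hc hcs hcp
          have hcs' : c < heap.size := by simpa [Array.set!] using hcs
          by_cases hcpos : c = pos
          · subst hcpos
            rw [hpGet_set_self heap c _ hcs']
            exact pyLt_asymm _ _ hlt
          · rw [hpGet_set_ne heap pos c _ hcpos]
            have hJ := J1 c hc hcs' (by omega) (by omega) hcpos
            rw [hcp] at hJ
            have hle1 : pyLt (hpGet heap ((pos - 1) / 2)) newitem = false :=
              pyLt_asymm _ _ hlt
            exact pyLe_trans newitem (hpGet heap ((pos - 1) / 2)) (hpGet heap c) hle1 hJ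
        · -- K for the new state
          intro hsp' c hc hcs hcp
          have hcs' : c < heap.size := by simpa [Array.set!] using hcs
          have hgp_le : startpos ≤ ((pos - 1) / 2 - 1) / 2 :=
            isAnc_le _ _ (isAnc_parent _ _ (isAnc_parent _ _ hanc hsp) hsp')
          have hgp_ne : ((pos - 1) / 2 - 1) / 2 ≠ pos := by omega
          rw [hpGet_set_ne heap pos _ _ hgp_ne]
          have e1 := J1 ((pos - 1) / 2) (by omega) (by omega) hgp_le (by omega) (by omega)
          by_cases hcpos : c = pos
          · subst hcpos
            rw [hpGet_set_self heap c _ hcs']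
            exact e1
          · rw [hpGet_set_ne heap pos c _ hcpos]
            have e2 := J1 c hc hcs' (by omega) (by omega) hcpos
            rw [hcp] at e2
            exact pyLe_trans (hpGet heap (((pos - 1) / 2 - 1) / 2))
              (hpGet heap ((pos - 1) / 2)) (hpGet heap c) e1 e2
      · have hlt' : pyLt newitem (hpGet heap ((pos - 1) / 2)) = false := by
          revert hlt; cases pyLt newitem (hpGet heap ((pos - 1) / 2)) <;> simp
        rw [siftdownLoop_stop fuel heap startpos pos newitem hsp hlt']
        exact place_parents heap startpos pos newitem hpos J1 J2 (Or.inr hlt')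
    · rw [siftdownLoop_exit fuel heap startpos pos newitem hsp]
      have hle := isAnc_le _ _ hanc
      exact place_parents heap startpos pos newitem hpos J1 J2 (Or.inl (by omega))

theorem siftdown_parents (heap : Array (Int × String)) (startpos pos : Nat)
    (hpos : pos < heap.size) (hanc : IsAnc startpos pos)
    (J1 : ∀ c, 0 < c → c < heap.size → startpos ≤ (c - 1) / 2 → (c - 1) / 2 ≠ pos → c ≠ pos →
      pyLt (hpGet heap c) (hpGet heap ((c - 1) / 2)) = false)
    (J2 : ∀ c, 0 < c → c < heap.size → (c - 1) / 2 = pos →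
      pyLt (hpGet heap c) (hpGet heap pos) = false)
    (K : startpos < pos → ∀ c, 0 < c → c < heap.size → (c - 1) / 2 = pos →
      pyLt (hpGet heap c) (hpGet heap ((pos - 1) / 2)) = false) :
    ParentsOK (siftdown heap startpos pos) startpos := by
  exact siftdownLoop_parents pos heap startpos pos (hpGet heap pos)
    (by omega) hpos hanc J1 J2 K

theorem siftupLoop_parents (pos0 : Nat) : ∀ (fuel : Nat) (heap : Array (Int × String))
    (endpos pos childpos : Nat),
    endpos = heap.size → endpos - childpos ≤ fuel → pos < heap.size →
    childpos = 2 * pos + 1 → IsAnc pos0 pos →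
    (∀ c, 0 < c → c < heap.size → pos0 ≤ (c - 1) / 2 → (c - 1) / 2 ≠ pos → c ≠ pos →
      pyLt (hpGet heap c) (hpGet heap ((c - 1) / 2)) = false) →
    (pos0 < pos → ∀ c, 0 < c → c < heap.size → (c - 1) / 2 = pos →
      pyLt (hpGet heap c) (hpGet heap ((pos - 1) / 2)) = false) →
    (siftupLoop fuel heap endpos pos childpos).1.size = heap.size ∧
    (siftupLoop fuel heap endpos pos childpos).2 < heap.size ∧
    IsAnc pos0 (siftupLoop fuel heap endpos pos childpos).2 ∧
    endpos ≤ 2 * (siftupLoop fuel heap endpos pos childpos).2 + 1 ∧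
    (∀ c, 0 < c → c < heap.size → pos0 ≤ (c - 1) / 2 →
      (c - 1) / 2 ≠ (siftupLoop fuel heap endpos pos childpos).2 →
      c ≠ (siftupLoop fuel heap endpos pos childpos).2 →
      pyLt (hpGet (siftupLoop fuel heap endpos pos childpos).1 c)
           (hpGet (siftupLoop fuel heap endpos pos childpos).1 ((c - 1) / 2)) = false) := by
  intro fuel
  induction fuel with
  | zero =>
    intro heap endpos pos childpos hend hfuel hpos hchild hanc L1 K
    simp only [siftupLoop]
    exact ⟨by simp, hpos, hanc, by omega, L1⟩
  | succ fuel ih =>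
    intro heap endpos pos childpos hend hfuel hpos hchild hanc L1 K
    have hp0 : pos0 ≤ pos := isAnc_le _ _ hanc
    by_cases hce : childpos < endpos
    · rw [siftupLoop_step fuel heap endpos pos childpos hce]
      have hc2cases := pickChild_cases heap endpos childpos
      have hc2lt : pickChild heap endpos childpos < endpos :=
        pickChild_lt heap endpos childpos hce
      set c2 := pickChild heap endpos childpos with hc2def
      have hc2size : c2 < heap.size := by omega
      have hc2par : (c2 - 1) / 2 = pos := by omega
      have hposlt : pos < c2 := by omega
      have hss : (heap.set! pos (hpGet heap c2)).size = heap.size := by simp [Array.set!]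
      rw [← hss]
      refine ih (heap.set! pos (hpGet heap c2)) endpos c2 (2 * c2 + 1)
        (by simp [Array.set!]; omega) (by omega) (by simp [Array.set!]; omega) rfl
        (IsAnc.step c2 (by omega) (by rw [hc2par]; exact hanc)) ?_ ?_
      · -- L1 for the new state
        intro c hc hcs hcp hcpne hcne
        have hcs' : c < heap.size := by simpa [Array.set!] using hcs
        by_cases hcpos : c = pos
        · subst hcpos
          have hpar_ne : (c - 1) / 2 ≠ c := by omega
          rw [hpGet_set_self heap c _ hcs', hpGet_set_ne heap c _ _ hpar_ne]
          have hpp : pos0 < c := by omega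
          exact K hpp c2 (by omega) hc2size hc2par
        · by_cases hparpos : (c - 1) / 2 = pos
          · rw [hpGet_set_ne heap pos c _ hcpos, hparpos, hpGet_set_self heap pos _ hpos]
            have := pickChild_min heap endpos childpos c (by omega) (by omega)
            rw [← hc2def] at this
            exact this
          · rw [hpGet_set_ne heap pos c _ hcpos, hpGet_set_ne heap pos _ _ hparpos]
            exact L1 c hc hcs' hcp hparpos hcpos
      · -- K for the new state
        intro hlt c hc hcs hcp
        have hcs' : c < heap.size := by simpa [Array.set!] using hcs
        rw [hc2par]
        have hcc2 : c2 < c := by omega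
        have hcne : c ≠ pos := by omega
        rw [hpGet_set_ne heap pos c _ hcne, hpGet_set_self heap pos _ hpos]
        have hL := L1 c hc hcs' (by omega) (by omega) hcne
        rw [hcp] at hL
        exact hL
    · rw [siftupLoop_exit fuel heap endpos pos childpos hce]
      exact ⟨rfl, hpos, hanc, by omega, L1⟩

theorem siftup_parents (heap : Array (Int × String)) (pos0 : Nat)
    (h0 : pos0 < heap.size)
    (H : ∀ c, 0 < c → c < heap.size → pos0 < (c - 1) / 2 →
      pyLt (hpGet heap c) (hpGet heap ((c - 1) / 2)) = false) :
    ParentsOK (siftup heap pos0) pos0 := by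
  show ParentsOK (siftdown
      ((siftupLoop heap.size heap heap.size pos0 (2 * pos0 + 1)).1.set!
        (siftupLoop heap.size heap heap.size pos0 (2 * pos0 + 1)).2 (hpGet heap pos0))
      pos0 (siftupLoop heap.size heap heap.size pos0 (2 * pos0 + 1)).2) pos0
  obtain ⟨hsz, hq, hanc, hleaf, L1q⟩ :=
    siftupLoop_parents pos0 heap.size heap heap.size pos0 (2 * pos0 + 1) rfl (by omega) h0 rfl
      IsAnc.refl
      (fun c hc hcs hcp hcpne hcne => H c hc hcs (by omega))
      (fun h => absurd h (by omega))
  set r := siftupLoop heap.size heap heap.size pos0 (2 * pos0 + 1) with hrdef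
  have hgsz : (r.1.set! r.2 (hpGet heap pos0)).size = heap.size := by
    simp [Array.set!, hsz]
  refine siftdown_parents _ pos0 r.2 (by rw [hgsz]; exact hq) hanc ?_ ?_ ?_
  · intro c hc hcs hcp hcpne hcne
    rw [hgsz] at hcs
    rw [hpGet_set_ne r.1 r.2 c _ hcne, hpGet_set_ne r.1 r.2 _ _ hcpne]
    exact L1q c hc hcs hcp hcpne hcne
  · intro c hc hcs hcp
    exfalso
    rw [hgsz] at hcs
    omega
  · intro _ c hc hcs hcp
    exfalso
    rw [hgsz] at hcs
    omega

theorem heapify_aux : ∀ (k : Nat) (h : Array (Int × String)), 2 * k ≤ h.size →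
    ParentsOK h k →
    ParentsOK ((List.range k).reverse.foldl (fun h i => siftup h i) h) 0 := by
  intro k
  induction k with
  | zero => intro h _ hp; exact hp
  | succ k ih =>
    intro h hk hp
    have hks : k < h.size := by omega
    have hrw : (List.range (k + 1)).reverse = k :: (List.range k).reverse := by
      rw [List.range_succ]; simp
    rw [hrw, List.foldl_cons]
    have hsift : ParentsOK (siftup h k) k :=
      siftup_parents h k hks (fun c hc hcs hcp => hp c hc hcs (by omega))
    refine ih (siftup h k) ?_ hsift
    rw [size_siftup]; omega

theorem heapify_parents (heap : Array (Int × String)) : ParentsOK (heapify heap) 0 := by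
  unfold heapify
  refine heapify_aux (heap.size / 2) heap (by omega) ?_
  intro c hc hcs hcp
  exfalso; omega

theorem heappush_parents (heap : Array (Int × String)) (item : Int × String)
    (hp : ParentsOK heap 0) : ParentsOK (heappush heap item) 0 := by
  show ParentsOK (siftdown (heap.push item) 0 ((heap.push item).size - 1)) 0
  have hsz : (heap.push item).size = heap.size + 1 := by simp
  have hpos_eq : (heap.push item).size - 1 = heap.size := by omega
  rw [hpos_eq]
  refine siftdown_parents (heap.push item) 0 heap.size (by omega) (isAnc_zero _) ?_ ?_ ?_
  · intro c hc hcs hcp hcpne hcne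
    rw [hsz] at hcs
    have hcl : c < heap.size := by omega
    rw [hpGet_push_lt heap item c hcl, hpGet_push_lt heap item _ (by omega)]
    exact hp c hc hcl hcp
  · intro c hc hcs hcp
    exfalso; rw [hsz] at hcs; omega
  · intro _ c hc hcs hcp
    exfalso; rw [hsz] at hcs; omega

theorem heappop_parents (heap : Array (Int × String)) (hp : ParentsOK heap 0) :
    ParentsOK (heappop heap).2 0 := by
  unfold heappop
  by_cases h0 : heap.pop.size ≠ 0
  · rw [if_pos h0]
    show ParentsOK (siftup (heap.pop.set! 0 (hpGet heap (heap.size - 1))) 0) 0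
    have hm : 0 < heap.pop.size := Nat.pos_of_ne_zero h0
    have hmsz : heap.pop.size = heap.size - 1 := Array.size_pop
    refine siftup_parents _ 0 (by simp [Array.set!]; omega) ?_
    intro c hc hcs hcp
    have hcs' : c < heap.size - 1 := by
      have : c < heap.pop.size := by simpa [Array.set!] using hcs
      omega
    have hc0 : c ≠ 0 := by omega
    have hp0 : (c - 1) / 2 ≠ 0 := by omega
    rw [hpGet_set_ne heap.pop 0 c _ hc0, hpGet_set_ne heap.pop 0 _ _ hp0,
      hpGet_pop heap c hcs', hpGet_pop heap _ (by omega)]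
    exact hp c hc (by omega) (by omega)
  · rw [if_neg h0]
    intro c hc hcs hcp
    exfalso
    have : heap.pop.size = 0 := by omega
    simp only [this] at hcs
    omega

theorem root_min (h : Array (Int × String)) (hp : ParentsOK h 0) :
    ∀ j, j < h.size → pyLt (hpGet h j) (hpGet h 0) = false := by
  intro j
  induction j using Nat.strong_induction_on with
  | _ j ih =>
    intro hj
    cases j with
    | zero => exact pyLt_irrefl _
    | succ q =>
      have h1 := ih ((q + 1 - 1) / 2) (by omega) (by omega)
      have h2 := hp (q + 1) (by omega) hj (by omega)
      exact pyLe_trans _ _ _ h1 h2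

theorem heappop_fst (h : Array (Int × String)) (hs : 0 < h.size) :
    (heappop h).1 = hpGet h 0 := by
  unfold heappop
  by_cases h0 : h.pop.size ≠ 0
  · rw [if_pos h0]
    have hps : 0 < h.pop.size := Nat.pos_of_ne_zero h0
    show hpGet h.pop 0 = hpGet h 0
    have hmsz : h.pop.size = h.size - 1 := Array.size_pop
    exact hpGet_pop h 0 (by omega)
  · rw [if_neg h0]
    show hpGet h (h.size - 1) = hpGet h 0
    have hmsz : h.pop.size = h.size - 1 := Array.size_pop
    have h1 : h.size = 1 := by omega
    rw [h1]

theorem heappop_head (h : Array (Int × String)) (x : Int × String) (l : List (Int × String))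
    (hp : ParentsOK h 0) (hperm : h.toList.Perm (x :: l))
    (hch : List.IsChain (fun a b => pyLt b a = false) (x :: l)) :
    (heappop h).1 = x ∧ (heappop h).2.toList.Perm l := by
  have hs : 0 < h.size := by
    have := hperm.length_eq
    simp at this
    omega
  have hx0 : (heappop h).1 = hpGet h 0 := heappop_fst h hs
  have hmem : hpGet h 0 ∈ x :: l := by
    refine hperm.subset ?_
    rw [hpGet_eq_getElem h 0 hs, getElem_eq_toList h 0 hs]
    exact List.getElem_mem _
  have hxmem : x ∈ h.toList := hperm.symm.subset List.mem_cons_self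
  obtain ⟨i, hi, hie⟩ := mem_toList_hpGet h x hxmem
  have hle1 : pyLt x (hpGet h 0) = false := by
    rw [← hie]; exact root_min h hp i hi
  have hle2 : pyLt (hpGet h 0) x = false := by
    have hpw : (x :: l).Pairwise (fun a b => pyLt b a = false) := by
      haveI : Trans (fun a b : Int × String => pyLt b a = false)
          (fun a b : Int × String => pyLt b a = false)
          (fun a b : Int × String => pyLt b a = false) :=
        ⟨fun h1 h2 => pyLe_trans _ _ _ h1 h2⟩
      exact List.isChain_iff_pairwise.mp hch
    rcases List.mem_cons.mp hmem with he | hmem'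
    · rw [he]; exact pyLt_irrefl _
    · exact (List.pairwise_cons.mp hpw).1 _ hmem'
  have hx : (heappop h).1 = x := by rw [hx0]; exact pyLt_antisymm _ _ hle2 hle1
  refine ⟨hx, ?_⟩
  have hpp := (heappop_perm h hs).trans hperm
  rw [hx] at hpp
  exact hpp.cons_inv

-- ---------- B's insertion-sorted list: insort keeps order and multiset ----------

theorem insort_perm (x : Int × String) (l : List (Int × String)) :
    (insort x l).Perm (x :: l) := by
  induction l with
  | nil => exact List.Perm.refl _
  | cons y ys ih =>
    unfold insort
    split
    · exact List.Perm.refl _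
    · exact (List.Perm.cons y ih).trans (List.Perm.swap x y ys)

theorem insort_length (x : Int × String) (l : List (Int × String)) :
    (insort x l).length = l.length + 1 := by
  have := (insort_perm x l).length_eq
  simpa using this

theorem insort_chain (x : Int × String) (l : List (Int × String))
    (h : List.IsChain (fun a b => pyLt b a = false) l) :
    List.IsChain (fun a b => pyLt b a = false) (insort x l) := by
  induction l with
  | nil => exact List.isChain_singleton x
  | cons y ys ih =>
    unfold insort
    split
    · rename_i hlt
      refine List.isChain_cons.mpr ⟨?_, h⟩
      intro z hz
      simp at hz
      subst hz
      exact pyLt_asymm x y hlt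
    · rename_i hlt
      have hxy : pyLt x y = false := by revert hlt; cases pyLt x y <;> simp
      have hys := (List.isChain_cons.mp h).2
      have hih := ih hys
      refine List.isChain_cons.mpr ⟨?_, hih⟩
      intro z hz
      cases ys with
      | nil =>
        simp [insort] at hz
        subst hz
        exact hxy
      | cons w ws =>
        unfold insort at hz
        split at hz
        · simp at hz
          subst hz
          exact hxy
        · simp at hz
          subst hz
          exact (List.isChain_cons.mp h).1 w rfl

-- ---------- chains in A's parent-pointer tree ----------

-- HChain t p s code: following parent pointers from p ends at s (not a key of t),
-- collecting exactly A's trace string code.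
inductive HChain (t : PySem.Dict String (Int × String)) : String → String → String → Prop
  | base (s : String) (h : t.get? s = none) : HChain t s s ""
  | step (p q s code : String) (bit : Int) (h : t.get? p = some (bit, q))
      (hc : HChain t q s code) : HChain t p s (code ++ PySem.Int.toStr bit)

-- every key is shorter than its parent and its chars are among the parent's
def TreeOK (t : PySem.Dict String (Int × String)) : Prop :=
  ∀ pr ∈ t.items, pr.1.toList.length < pr.2.2.toList.length ∧ ∀ c ∈ pr.1.toList, c ∈ pr.2.2.toList

-- every key's chars sit inside some live node, which is strictly longer
def RootsOK (t : PySem.Dict String (Int × String)) (hs : List (Int × String)) : Prop :=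
  ∀ p ∈ t.keys, ∃ e ∈ hs, (∀ c ∈ p.toList, c ∈ e.2.toList) ∧ p.toList.length < e.2.toList.length

theorem hchain_root_none (t : PySem.Dict String (Int × String)) (p s code : String)
    (h : HChain t p s code) : t.get? s = none := by
  induction h with
  | base s h => exact h
  | step p q s code bit h hc ih => exact ih

theorem hchain_sub (t : PySem.Dict String (Int × String)) (ht : TreeOK t) (p s code : String)
    (h : HChain t p s code) : ∀ c ∈ p.toList, c ∈ s.toList := by
  induction h with
  | base s h => intro c hc; exact hc
  | step p q s code bit h hc ih =>
    intro c hcp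
    exact ih c ((ht (p, (bit, q)) (PySem.Dict.mem_items_of_get?_eq_some t h)).2 c hcp)

theorem hchain_ne_of_disjoint (t : PySem.Dict String (Int × String)) (ht : TreeOK t)
    (p s code : String) (h : HChain t p s code) (x : String)
    (hxne : x.toList ≠ []) (hxd : ∀ c ∈ x.toList, c ∉ s.toList) : p ≠ x := by
  intro hpx
  subst hpx
  obtain ⟨c, hc⟩ := List.exists_mem_of_ne_nil _ hxne
  exact hxd c hc (hchain_sub t ht p s code h c hc)

-- inserting two keys whose chars avoid the chain's root leaves the chain intact
theorem hchain_lift (t : PySem.Dict String (Int × String)) (ht : TreeOK t)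
    (x y : String) (vx vy : Int × String) (p s code : String)
    (hch : HChain t p s code)
    (hxne : x.toList ≠ []) (hxd : ∀ c ∈ x.toList, c ∉ s.toList)
    (hyne : y.toList ≠ []) (hyd : ∀ c ∈ y.toList, c ∉ s.toList) :
    HChain ((t.insert x vx).insert y vy) p s code := by
  induction hch with
  | base s h =>
    refine HChain.base s ?_
    have hsx : s ≠ x := by
      intro he; subst he
      obtain ⟨c, hc⟩ := List.exists_mem_of_ne_nil _ hxne
      exact hxd c hc hc
    have hsy : s ≠ y := by
      intro he; subst he
      obtain ⟨c, hc⟩ := List.exists_mem_of_ne_nil _ hyne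
      exact hyd c hc hc
    rw [PySem.Dict.get?_insert_of_ne _ _ hsy, PySem.Dict.get?_insert_of_ne _ _ hsx]
    exact h
  | step p q s code bit h hc ih =>
    have hpx : p ≠ x :=
      hchain_ne_of_disjoint t ht p s _ (HChain.step p q s code bit h hc) x hxne hxd
    have hpy : p ≠ y :=
      hchain_ne_of_disjoint t ht p s _ (HChain.step p q s code bit h hc) y hyne hyd
    refine HChain.step p q s code bit ?_ (ih hxd hyd)
    rw [PySem.Dict.get?_insert_of_ne _ _ hpy, PySem.Dict.get?_insert_of_ne _ _ hpx]
    exact h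

-- a chain ending at x gets extended through the fresh merge node s' with bit 0
theorem hchain_extendA (t : PySem.Dict String (Int × String)) (ht : TreeOK t)
    (x y s' : String) (p code : String)
    (hch : HChain t p x code)
    (hxy : x ≠ y)
    (hs' : ((t.insert x (0, s')).insert y (1, s')).get? s' = none)
    (hyne : y.toList ≠ []) (hyd : ∀ c ∈ y.toList, c ∉ x.toList) :
    HChain ((t.insert x (0, s')).insert y (1, s')) p s' (PySem.Int.toStr 0 ++ code) := by
  induction hch with
  | base s h =>
    have hgx : ((t.insert s (0, s')).insert y (1, s')).get? s = some (0, s') := by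
      rw [PySem.Dict.get?_insert_of_ne _ _ hxy, PySem.Dict.get?_insert_self]
    have hstep := HChain.step s s' s' "" 0 hgx (HChain.base s' hs')
    rw [String.empty_append] at hstep
    rw [String.append_empty]
    exact hstep
  | step p q s code bit h hc ih =>
    have hps : p ≠ s := by
      intro he
      have hn := hchain_root_none t q s code hc
      rw [← he] at hn
      rw [hn] at h
      simp at h
    have hpy : p ≠ y :=
      hchain_ne_of_disjoint t ht p s _ (HChain.step p q s code bit h hc) y hyne hyd
    have hg : ((t.insert s (0, s')).insert y (1, s')).get? p = some (bit, q) := by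
      rw [PySem.Dict.get?_insert_of_ne _ _ hpy, PySem.Dict.get?_insert_of_ne _ _ hps]
      exact h
    have hstep := HChain.step p q s' (PySem.Int.toStr 0 ++ code) bit hg (ih hxy hs' hyd)
    rw [String.append_assoc] at hstep
    exact hstep

-- a chain ending at y gets extended through the fresh merge node s' with bit 1
theorem hchain_extendB (t : PySem.Dict String (Int × String)) (ht : TreeOK t)
    (x y s' : String) (p code : String)
    (hch : HChain t p y code)
    (hs' : ((t.insert x (0, s')).insert y (1, s')).get? s' = none)
    (hxne : x.toList ≠ []) (hxd : ∀ c ∈ x.toList, c ∉ y.toList) :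
    HChain ((t.insert x (0, s')).insert y (1, s')) p s' (PySem.Int.toStr 1 ++ code) := by
  induction hch with
  | base s h =>
    have hgy : ((t.insert x (0, s')).insert s (1, s')).get? s = some (1, s') :=
      PySem.Dict.get?_insert_self _ _ _
    have hstep := HChain.step s s' s' "" 1 hgy (HChain.base s' hs')
    rw [String.empty_append] at hstep
    rw [String.append_empty]
    exact hstep
  | step p q s code bit h hc ih =>
    have hps : p ≠ s := by
      intro he
      have hn := hchain_root_none t q s code hc
      rw [← he] at hn
      rw [hn] at h
      simp at h
    have hpx : p ≠ x :=
      hchain_ne_of_disjoint t ht p s _ (HChain.step p q s code bit h hc) x hxne hxd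
    have hg : ((t.insert x (0, s')).insert s (1, s')).get? p = some (bit, q) := by
      rw [PySem.Dict.get?_insert_of_ne _ _ hps, PySem.Dict.get?_insert_of_ne _ _ hpx]
      exact h
    have hstep := HChain.step p q s' (PySem.Int.toStr 1 ++ code) bit hg (ih hs' hxd)
    rw [String.append_assoc] at hstep
    exact hstep

-- ---------- the codes dictionary under B's per-merge prefix folds ----------

theorem singleton_inj (c d : Char) (h : String.singleton c = String.singleton d) : c = d := by
  have := congrArg String.toList h
  simpa using this

theorem getD_prefixFold_not_mem (l : List Char) (pre : String)
    (k : PySem.Dict String String) (x : String) (hx : ∀ c ∈ l, String.singleton c ≠ x) :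
    (l.foldl (fun k ch =>
        k.insert (String.singleton ch) (pre ++ k.getD (String.singleton ch) "")) k).getD x ""
      = k.getD x "" := by
  induction l generalizing k with
  | nil => rfl
  | cons c r ih =>
    simp only [List.foldl_cons]
    rw [ih _ (fun c' hc' => hx c' (List.mem_cons_of_mem c hc'))]
    rw [PySem.Dict.getD_insert]
    exact if_neg (fun he => hx c List.mem_cons_self (Eq.symm he))

theorem getD_prefixFold_mem (l : List Char) (pre : String)
    (k : PySem.Dict String String) (c : Char) (hnd : l.Nodup) (hc : c ∈ l) :
    (l.foldl (fun k ch =>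
        k.insert (String.singleton ch) (pre ++ k.getD (String.singleton ch) "")) k).getD
        (String.singleton c) ""
      = pre ++ k.getD (String.singleton c) "" := by
  induction l generalizing k with
  | nil => simp at hc
  | cons d r ih =>
    simp only [List.foldl_cons]
    by_cases hcd : c = d
    · subst hcd
      have hnr : c ∉ r := (List.nodup_cons.mp hnd).1
      rw [getD_prefixFold_not_mem r pre _ (String.singleton c)
        (fun c' hc' he => hnr (singleton_inj c' c he ▸ hc'))]
      rw [PySem.Dict.getD_insert, if_pos rfl]
    · have hcr : c ∈ r := by
        cases List.mem_cons.mp hc with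
        | inl h => exact absurd h hcd
        | inr h => exact h
      rw [ih _ ((List.nodup_cons.mp hnd).2) hcr]
      rw [PySem.Dict.getD_insert, if_neg (fun he => hcd (singleton_inj c d he))]

theorem setUpdate_of_subset (ks xs : List String) (h : ∀ x ∈ xs, x ∈ ks) :
    PySem.Set.update ks xs = ks := by
  rw [PySem.Set.update_eq_append_filter]
  have hnil : (PySem.Set.ofList xs).filter (fun y => !(PySem.Set.contains ks y)) = [] := by
    rw [List.filter_eq_nil_iff]
    intro a ha
    have hks : a ∈ ks := h a ((PySem.Set.mem_ofList _ _).mp ha)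
    simpa using hks
  rw [hnil, List.append_nil]

theorem keys_prefixFold (l : List Char) (pre : String) (k : PySem.Dict String String)
    (h : ∀ c ∈ l, String.singleton c ∈ k.keys) :
    (l.foldl (fun k ch =>
        k.insert (String.singleton ch) (pre ++ k.getD (String.singleton ch) "")) k).keys
      = k.keys := by
  rw [PySem.Dict.keys_foldl_insert_key l String.singleton
      (fun k ch => pre ++ k.getD (String.singleton ch) "") k]
  refine setUpdate_of_subset _ _ ?_
  intro x hx
  obtain ⟨c, hc, rfl⟩ := List.mem_map.mp hx
  exact h c hc

-- ---------- A's trace loop computes the chain code ----------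

theorem filter_length_lt (l : List ((String × (Int × String)))) (p : (String × (Int × String)) → Bool)
    (x : String × (Int × String)) (hx : x ∈ l) (hp : p x = false) :
    (l.filter p).length < l.length := by
  induction l with
  | nil => simp at hx
  | cons a r ih =>
    cases List.mem_cons.mp hx with
    | inl h =>
      subst h
      simp only [List.filter_cons, hp, Bool.false_eq_true, if_false, List.length_cons]
      have := List.length_filter_le p r
      omega
    | inr h =>
      by_cases hpa : p a = true
      · simp only [List.filter_cons, hpa, if_true, List.length_cons]
        have := ih h
        omega
      · simp only [List.filter_cons, hpa, Bool.false_eq_true, if_false, List.length_cons]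
        have := ih h
        omega

theorem trace_of_hchain (t : PySem.Dict String (Int × String)) (ht : TreeOK t)
    (p s code : String) (h : HChain t p s code) :
    ∀ (acc : String) (fuel : Nat),
      (t.items.filter (fun pr => decide (p.toList.length ≤ pr.1.toList.length))).length < fuel →
      traceAux fuel t p acc = code ++ acc := by
  induction h with
  | base s h =>
    intro acc fuel hfuel
    cases fuel with
    | zero => omega
    | succ f =>
      simp only [traceAux, h, String.empty_append]
  | step p q s code bit h hc ih =>
    intro acc fuel hfuel
    cases fuel with
    | zero => omega
    | succ f =>
      simp only [traceAux, h]
      have hmem := PySem.Dict.mem_items_of_get?_eq_some t h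
      have hpq := (ht (p, (bit, q)) hmem).1
      simp only [] at hpq
      have hpq' : p.toList.length < q.toList.length := hpq
      have hfilq : (t.items.filter (fun pr => decide (q.toList.length ≤ pr.1.toList.length))).length < f := by
        have hsub : t.items.filter (fun pr => decide (q.toList.length ≤ pr.1.toList.length))
            = (t.items.filter (fun pr => decide (p.toList.length ≤ pr.1.toList.length))).filter
                (fun pr => decide (q.toList.length ≤ pr.1.toList.length)) := by
          rw [List.filter_filter]
          refine (List.filter_congr ?_).symm
          intro pr _
          by_cases hq : q.toList.length ≤ pr.1.toList.length
          · have hp' : p.toList.length ≤ pr.1.toList.length := by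
              have := hpq'
              omega
            rw [decide_eq_true hq, decide_eq_true hp', Bool.true_and]
          · rw [decide_eq_false hq]
            simp
        have hstrict : ((t.items.filter (fun pr => decide (p.toList.length ≤ pr.1.toList.length))).filter
              (fun pr => decide (q.toList.length ≤ pr.1.toList.length))).length
            < (t.items.filter (fun pr => decide (p.toList.length ≤ pr.1.toList.length))).length := by
          refine filter_length_lt _ _ (p, (bit, q)) ?_ ?_
          · exact List.mem_filter.mpr ⟨hmem,
              decide_eq_true (show p.toList.length ≤ p.toList.length from le_refl _)⟩
          · exact decide_eq_false (fun hle =>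
              absurd (show q.toList.length ≤ p.toList.length from hle) (by omega))
        rw [hsub]
        omega
      rw [ih (PySem.Int.toStr bit ++ acc) f hfilq]
      rw [String.append_assoc]

theorem trace_eq_code (t : PySem.Dict String (Int × String)) (ht : TreeOK t)
    (p s code : String) (h : HChain t p s code) :
    traceAux (t.size + 1) t p "" = code := by
  have hfuel : (t.items.filter (fun pr => decide (p.toList.length ≤ pr.1.toList.length))).length < t.size + 1 := by
    have := List.length_filter_le (fun pr => decide (p.toList.length ≤ pr.1.toList.length)) t.items
    have hsz : t.items.length = t.size := rfl
    omega
  have := trace_of_hchain t ht p s code h "" (t.size + 1) hfuel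
  rwa [String.append_empty] at this

-- ---------- the merge-loop invariant tying A's tree to B's codes ----------

def HInv (cs : List Char) (ks : List String) (hs : List (Int × String))
    (t : PySem.Dict String (Int × String)) (k : PySem.Dict String String) : Prop :=
  ((hs.map (fun e => e.2.toList)).flatten).Perm cs ∧
  (∀ e ∈ hs, e.2.toList ≠ []) ∧
  (∀ e ∈ hs, ∀ c ∈ e.2.toList,
    HChain t (String.singleton c) e.2 (k.getD (String.singleton c) "")) ∧
  TreeOK t ∧ RootsOK t hs ∧ k.keys = ks ∧
  (∀ e ∈ hs, ∀ c ∈ e.2.toList, String.singleton c ∈ ks)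

theorem hinv_perm (cs : List Char) (ks : List String) (hs hs' : List (Int × String))
    (t : PySem.Dict String (Int × String)) (k : PySem.Dict String String)
    (hp : hs.Perm hs') (h : HInv cs ks hs t k) : HInv cs ks hs' t k := by
  obtain ⟨h1, h2, h3, h4, h5, h6, h7⟩ := h
  refine ⟨((hp.map _).flatten).symm.trans h1, ?_, ?_, h4, ?_, h6, ?_⟩
  · intro e he; exact h2 e (hp.symm.subset he)
  · intro e he; exact h3 e (hp.symm.subset he)
  · intro p hpk
    obtain ⟨e, he, hsub, hlt⟩ := h5 p hpk
    exact ⟨e, hp.subset he, hsub, hlt⟩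
  · intro e he; exact h7 e (hp.symm.subset he)

theorem hinv_step (cs : List Char) (ks : List String) (a b : Int × String)
    (rest : List (Int × String)) (t : PySem.Dict String (Int × String))
    (k : PySem.Dict String String) (hnd : cs.Nodup)
    (hinv : HInv cs ks (a :: b :: rest) t k) :
    HInv cs ks ((a.1 + b.1, a.2 ++ b.2) :: rest)
      ((t.insert a.2 (0, a.2 ++ b.2)).insert b.2 (1, a.2 ++ b.2))
      (b.2.toList.foldl
        (fun k ch => k.insert (String.singleton ch) ("1" ++ k.getD (String.singleton ch) ""))
        (a.2.toList.foldl
          (fun k ch => k.insert (String.singleton ch) ("0" ++ k.getD (String.singleton ch) ""))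
          k)) := by
  obtain ⟨h1, h2, h3, h4, h5, h6, h7⟩ := hinv
  have hS' : (a.2 ++ b.2).toList = a.2.toList ++ b.2.toList := String.toList_append
  have hfl : (a.2.toList ++ (b.2.toList ++ (rest.map (fun e => e.2.toList)).flatten)).Perm cs := by
    simpa using h1
  have hflnd : (a.2.toList ++ (b.2.toList ++ (rest.map (fun e => e.2.toList)).flatten)).Nodup :=
    hfl.nodup_iff.mpr hnd
  have hA : a.2.toList.Nodup := (List.nodup_append'.mp hflnd).1
  have hdisjA : a.2.toList.Disjoint (b.2.toList ++ (rest.map (fun e => e.2.toList)).flatten) :=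
    (List.nodup_append'.mp hflnd).2.2
  have hrest' := (List.nodup_append'.mp hflnd).2.1
  have hB : b.2.toList.Nodup := (List.nodup_append'.mp hrest').1
  have hdisjB : b.2.toList.Disjoint ((rest.map (fun e => e.2.toList)).flatten) :=
    (List.nodup_append'.mp hrest').2.2
  have hAne : a.2.toList ≠ [] := h2 a List.mem_cons_self
  have hBne : b.2.toList ≠ [] := h2 b (List.mem_cons_of_mem a List.mem_cons_self)
  have hrestF : ∀ e ∈ rest, ∀ c ∈ e.2.toList, c ∈ (rest.map (fun e => e.2.toList)).flatten := by
    intro e he c hc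
    exact List.mem_flatten.mpr ⟨e.2.toList, List.mem_map.mpr ⟨e, he, rfl⟩, hc⟩
  have hAnotB : ∀ c ∈ a.2.toList, c ∉ b.2.toList := by
    intro c hc hcb
    exact hdisjA hc (List.mem_append_left _ hcb)
  have hBnotA : ∀ c ∈ b.2.toList, c ∉ a.2.toList := by
    intro c hc hca
    exact hdisjA hca (List.mem_append_left _ hc)
  have hAnotF : ∀ c ∈ a.2.toList, c ∉ (rest.map (fun e => e.2.toList)).flatten := by
    intro c hc hcf
    exact hdisjA hc (List.mem_append_right _ hcf)
  have hBnotF : ∀ c ∈ b.2.toList, c ∉ (rest.map (fun e => e.2.toList)).flatten := by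
    intro c hc hcf
    exact hdisjB hc hcf
  have hab : a.2 ≠ b.2 := by
    intro he
    obtain ⟨c, hc⟩ := List.exists_mem_of_ne_nil _ hAne
    exact hAnotB c hc (he ▸ hc)
  have hs'none :
      ((t.insert a.2 (0, a.2 ++ b.2)).insert b.2 (1, a.2 ++ b.2)).get? (a.2 ++ b.2) = none := by
    rw [PySem.Dict.get?_eq_none_iff_not_mem_keys]
    intro hmem
    have hlenA : 0 < a.2.toList.length := List.length_pos_iff.mpr hAne
    have hlenB : 0 < b.2.toList.length := List.length_pos_iff.mpr hBne
    rcases (PySem.Dict.mem_keys_insert _ _ _ _).mp hmem with he | hmem2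
    · have hteq := congrArg List.length (congrArg String.toList he)
      rw [hS', List.length_append] at hteq
      omega
    rcases (PySem.Dict.mem_keys_insert _ _ _ _).mp hmem2 with he | hmem3
    · have hteq := congrArg List.length (congrArg String.toList he)
      rw [hS', List.length_append] at hteq
      omega
    obtain ⟨e, he, hsub, hlt⟩ := h5 _ hmem3
    rcases List.mem_cons.mp he with rfl | he'
    · rw [hS', List.length_append] at hlt
      omega
    rcases List.mem_cons.mp he' with rfl | he''
    · rw [hS', List.length_append] at hlt
      omega
    · obtain ⟨c, hc⟩ := List.exists_mem_of_ne_nil _ hAne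
      have hcs' : c ∈ (a.2 ++ b.2).toList := by rw [hS']; exact List.mem_append_left _ hc
      exact hAnotF c hc (hrestF e he'' c (hsub c hcs'))
  refine ⟨?_, ?_, ?_, ?_, ?_, ?_, ?_⟩
  · -- flatten permutation
    simp only [List.map_cons, List.flatten_cons, hS']
    rw [List.append_assoc]
    exact hfl
  · -- nonempty nodes
    intro e he
    rcases List.mem_cons.mp he with rfl | he'
    · simp only [hS']
      intro hc
      exact hAne (List.append_eq_nil_iff.mp hc).1
    · exact h2 e (List.mem_cons_of_mem _ (List.mem_cons_of_mem _ he'))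
  · -- chains
    intro e he c hc
    rcases List.mem_cons.mp he with rfl | he'
    · simp only [hS'] at hc
      rcases List.mem_append.mp hc with hcA | hcB
      · have hkv : (b.2.toList.foldl
            (fun k ch => k.insert (String.singleton ch) ("1" ++ k.getD (String.singleton ch) ""))
            (a.2.toList.foldl
              (fun k ch => k.insert (String.singleton ch) ("0" ++ k.getD (String.singleton ch) ""))
              k)).getD (String.singleton c) ""
            = "0" ++ k.getD (String.singleton c) "" := by
          rw [getD_prefixFold_not_mem _ _ _ _
            (fun c' hc' he' => hAnotB c hcA ((singleton_inj c' c he').symm ▸ hc'))]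
          exact getD_prefixFold_mem _ _ _ _ hA hcA
        rw [hkv]
        have hch := h3 a List.mem_cons_self c hcA
        have := hchain_extendA t h4 a.2 b.2 (a.2 ++ b.2) (String.singleton c)
          (k.getD (String.singleton c) "") hch hab hs'none hBne hBnotA
        rwa [show PySem.Int.toStr 0 = "0" from by decide] at this
      · have hkv : (b.2.toList.foldl
            (fun k ch => k.insert (String.singleton ch) ("1" ++ k.getD (String.singleton ch) ""))
            (a.2.toList.foldl
              (fun k ch => k.insert (String.singleton ch) ("0" ++ k.getD (String.singleton ch) ""))
              k)).getD (String.singleton c) ""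
            = "1" ++ k.getD (String.singleton c) "" := by
          rw [getD_prefixFold_mem _ _ _ _ hB hcB]
          rw [getD_prefixFold_not_mem _ _ _ _
            (fun c' hc' he' => hBnotA c hcB ((singleton_inj c' c he').symm ▸ hc'))]
        rw [hkv]
        have hch := h3 b (List.mem_cons_of_mem a List.mem_cons_self) c hcB
        have := hchain_extendB t h4 a.2 b.2 (a.2 ++ b.2) (String.singleton c)
          (k.getD (String.singleton c) "") hch hs'none hAne hAnotB
        rwa [show PySem.Int.toStr 1 = "1" from by decide] at this
    · have hcF : c ∈ (rest.map (fun e => e.2.toList)).flatten := hrestF e he' c hc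
      have hcnA : c ∉ a.2.toList := fun hca => hAnotF c hca hcF
      have hcnB : c ∉ b.2.toList := fun hcb => hBnotF c hcb hcF
      have hkv : (b.2.toList.foldl
          (fun k ch => k.insert (String.singleton ch) ("1" ++ k.getD (String.singleton ch) ""))
          (a.2.toList.foldl
            (fun k ch => k.insert (String.singleton ch) ("0" ++ k.getD (String.singleton ch) ""))
            k)).getD (String.singleton c) ""
          = k.getD (String.singleton c) "" := by
        rw [getD_prefixFold_not_mem _ _ _ _
          (fun c' hc' he' => hcnB ((singleton_inj c' c he') ▸ hc'))]
        rw [getD_prefixFold_not_mem _ _ _ _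
          (fun c' hc' he' => hcnA ((singleton_inj c' c he') ▸ hc'))]
      rw [hkv]
      have hch := h3 e (List.mem_cons_of_mem _ (List.mem_cons_of_mem _ he')) c hc
      refine hchain_lift t h4 a.2 b.2 _ _ _ _ _ hch hAne ?_ hBne ?_
      · intro c' hc' hce
        exact hAnotF c' hc' (hrestF e he' c' hce)
      · intro c' hc' hce
        exact hBnotF c' hc' (hrestF e he' c' hce)
  · -- TreeOK
    intro pr hpr
    rcases (PySem.Dict.mem_items_insert _ _ _ _).mp hpr with rfl | ⟨hpr2, hne1⟩
    · constructor
      · simp only [hS', List.length_append]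
        have : 0 < a.2.toList.length := List.length_pos_iff.mpr hAne
        omega
      · intro c hc
        rw [hS']
        exact List.mem_append_right _ hc
    rcases (PySem.Dict.mem_items_insert _ _ _ _).mp hpr2 with rfl | ⟨hpr3, hne2⟩
    · constructor
      · simp only [hS', List.length_append]
        have : 0 < b.2.toList.length := List.length_pos_iff.mpr hBne
        omega
      · intro c hc
        rw [hS']
        exact List.mem_append_left _ hc
    · exact h4 pr hpr3
  · -- RootsOK
    intro p hp
    rcases (PySem.Dict.mem_keys_insert _ _ _ _).mp hp with rfl | hp2
    · refine ⟨(a.1 + b.1, a.2 ++ b.2), List.mem_cons_self, ?_, ?_⟩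
      · intro c hc
        rw [hS']
        exact List.mem_append_right _ hc
      · simp only [hS', List.length_append]
        have : 0 < a.2.toList.length := List.length_pos_iff.mpr hAne
        omega
    rcases (PySem.Dict.mem_keys_insert _ _ _ _).mp hp2 with rfl | hp3
    · refine ⟨(a.1 + b.1, a.2 ++ b.2), List.mem_cons_self, ?_, ?_⟩
      · intro c hc
        rw [hS']
        exact List.mem_append_left _ hc
      · simp only [hS', List.length_append]
        have : 0 < b.2.toList.length := List.length_pos_iff.mpr hBne
        omega
    · obtain ⟨e, he, hsub, hlt⟩ := h5 p hp3
      rcases List.mem_cons.mp he with rfl | he'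
      · refine ⟨(e.1 + b.1, e.2 ++ b.2), List.mem_cons_self, ?_, ?_⟩
        · intro c hc
          rw [String.toList_append]
          exact List.mem_append_left _ (hsub c hc)
        · rw [String.toList_append, List.length_append]
          omega
      rcases List.mem_cons.mp he' with rfl | he''
      · refine ⟨(a.1 + e.1, a.2 ++ e.2), List.mem_cons_self, ?_, ?_⟩
        · intro c hc
          rw [String.toList_append]
          exact List.mem_append_right _ (hsub c hc)
        · rw [String.toList_append, List.length_append]
          omega
      · exact ⟨e, List.mem_cons_of_mem _ he'', hsub, hlt⟩
  · -- keys of the codes dict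
    have hkA : ∀ c ∈ a.2.toList, String.singleton c ∈ k.keys := by
      intro c hc
      rw [h6]
      exact h7 a List.mem_cons_self c hc
    have hfst := keys_prefixFold a.2.toList "0" k hkA
    have hkB : ∀ c ∈ b.2.toList, String.singleton c ∈
        (a.2.toList.foldl
          (fun k ch => k.insert (String.singleton ch) ("0" ++ k.getD (String.singleton ch) ""))
          k).keys := by
      intro c hc
      rw [hfst, h6]
      exact h7 b (List.mem_cons_of_mem a List.mem_cons_self) c hc
    rw [keys_prefixFold b.2.toList "1" _ hkB, hfst, h6]
  · -- singleton keys tracked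
    intro e he c hc
    rcases List.mem_cons.mp he with rfl | he'
    · simp only [hS'] at hc
      rcases List.mem_append.mp hc with hcA | hcB
      · exact h7 a List.mem_cons_self c hcA
      · exact h7 b (List.mem_cons_of_mem a List.mem_cons_self) c hcB
    · exact h7 e (List.mem_cons_of_mem _ (List.mem_cons_of_mem _ he')) c hc

-- ---------- running the two merge loops in lockstep ----------

theorem merge_done (cs : List Char) (ks : List String) (hs : List (Int × String))
    (t : PySem.Dict String (Int × String)) (k : PySem.Dict String String)
    (hinv : HInv cs ks hs t k) :
    (∀ c ∈ cs, ∃ s, HChain t (String.singleton c) s (k.getD (String.singleton c) "")) ∧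
    TreeOK t ∧ k.keys = ks := by
  obtain ⟨h1, h2, h3, h4, h5, h6, h7⟩ := hinv
  refine ⟨?_, h4, h6⟩
  intro c hc
  have hcf : c ∈ (hs.map (fun e => e.2.toList)).flatten := h1.symm.subset hc
  obtain ⟨l, hl, hcl⟩ := List.mem_flatten.mp hcf
  obtain ⟨e, he, rfl⟩ := List.mem_map.mp hl
  exact ⟨e.2, h3 e he c hcl⟩

theorem merge_rel (n : Nat) : ∀ (heap : Array (Int × String)) (l : List (Int × String))
    (t : PySem.Dict String (Int × String)) (k : PySem.Dict String String)
    (cs : List Char) (ks : List String),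
    heap.size = n → l.length = n → cs.Nodup →
    heap.toList.Perm l → ParentsOK heap 0 →
    List.IsChain (fun a b => pyLt b a = false) l →
    HInv cs ks l t k →
    (∀ c ∈ cs, ∃ s, HChain (mergeA n heap t) (String.singleton c) s
        ((mergeB n l k).getD (String.singleton c) "")) ∧
    TreeOK (mergeA n heap t) ∧ (mergeB n l k).keys = ks := by
  induction n with
  | zero =>
    intro heap l t k cs ks hhs hls hnd hperm hpok hch hinv
    exact merge_done cs ks l t k hinv
  | succ n ih =>
    intro heap l t k cs ks hhs hls hnd hperm hpok hch hinv
    cases l with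
    | nil => simp at hls
    | cons a l2 =>
      cases l2 with
      | nil =>
        have hn0 : n = 0 := by simp at hls; omega
        have hsz1 : heap.size = 1 := by omega
        have hA : mergeA (n + 1) heap t = t := by
          simp [mergeA, hsz1]
        have hB : mergeB (n + 1) [a] k = k := rfl
        rw [hA, hB]
        exact merge_done cs ks [a] t k hinv
      | cons b rest =>
        have hlen : rest.length = n - 1 := by simp at hls; omega
        have hn1 : 1 ≤ n := by simp at hls; omega
        have h2sz : 1 < heap.size := by omega
        have hpop1 := heappop_head heap a (b :: rest) hpok hperm hch
        have hp1ok : ParentsOK (heappop heap).2 0 := heappop_parents heap hpok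
        have hch2 : List.IsChain (fun x y => pyLt y x = false) (b :: rest) := hch.tail
        have hpop2 := heappop_head (heappop heap).2 b rest hp1ok hpop1.2 hch2
        have hp2ok : ParentsOK (heappop (heappop heap).2).2 0 := heappop_parents _ hp1ok
        have hA : mergeA (n + 1) heap t
            = mergeA n (heappush (heappop (heappop heap).2).2
                ((heappop heap).1.1 + (heappop (heappop heap).2).1.1,
                 (heappop heap).1.2 ++ (heappop (heappop heap).2).1.2))
                ((t.insert (heappop heap).1.2
                    (0, (heappop heap).1.2 ++ (heappop (heappop heap).2).1.2)).insert
                  (heappop (heappop heap).2).1.2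
                  (1, (heappop heap).1.2 ++ (heappop (heappop heap).2).1.2)) := by
          simp [mergeA, if_pos h2sz]
        rw [hpop1.1, hpop2.1] at hA
        have hB : mergeB (n + 1) (a :: b :: rest) k
            = mergeB n (insort (a.1 + b.1, a.2 ++ b.2) rest)
                (b.2.toList.foldl
                  (fun k ch => k.insert (String.singleton ch) ("1" ++ k.getD (String.singleton ch) ""))
                  (a.2.toList.foldl
                    (fun k ch => k.insert (String.singleton ch) ("0" ++ k.getD (String.singleton ch) ""))
                    k)) := rfl
        rw [hA, hB]
        have hstep := hinv_step cs ks a b rest t k hnd hinv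
        have hinv' := hinv_perm cs ks _ _ _ _
          (insort_perm (a.1 + b.1, a.2 ++ b.2) rest).symm hstep
        have hpush := heappush_perm (heappop (heappop heap).2).2 (a.1 + b.1, a.2 ++ b.2)
        have hperm' : (heappush (heappop (heappop heap).2).2 (a.1 + b.1, a.2 ++ b.2)).toList.Perm
            (insort (a.1 + b.1, a.2 ++ b.2) rest) := by
          refine hpush.trans ?_
          exact ((List.perm_append_singleton _ _).trans
            (List.Perm.cons _ hpop2.2)).trans (insort_perm _ _).symm
        refine ih (heappush (heappop (heappop heap).2).2 (a.1 + b.1, a.2 ++ b.2))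
          (insort (a.1 + b.1, a.2 ++ b.2) rest) _ _ cs ks ?_ ?_ hnd hperm'
          (heappush_parents _ _ hp2ok) (insort_chain _ _ hch2.tail) hinv'
        · rw [size_heappush, size_heappop, size_heappop, hhs]; omega
        · rw [insort_length, hlen]; omega

-- ---------- initial state and final assembly ----------

theorem getD_emptyFold (l : List String) (k : PySem.Dict String String)
    (h : ∀ x, k.getD x "" = "") (x : String) :
    (l.foldl (fun k c => k.insert c "") k).getD x "" = "" := by
  induction l generalizing k with
  | nil => exact h x
  | cons c r ih =>
    simp only [List.foldl_cons]
    refine ih _ ?_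
    intro y
    rw [PySem.Dict.getD_insert]
    split
    · rfl
    · exact h y

theorem singletons_facts (l : List String) (h : ∀ s ∈ l, ∃ c, s = String.singleton c)
    (hnd : l.Nodup) :
    (l.map String.toList).flatten.Nodup ∧
    (∀ c, c ∈ (l.map String.toList).flatten ↔ String.singleton c ∈ l) := by
  induction l with
  | nil => simp
  | cons s r ih =>
    obtain ⟨c0, rfl⟩ := h s List.mem_cons_self
    obtain ⟨ihnd, ihmem⟩ := ih (fun s hs => h s (List.mem_cons_of_mem _ hs))
      (List.nodup_cons.mp hnd).2
    have hnotin : String.singleton c0 ∉ r := (List.nodup_cons.mp hnd).1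
    constructor
    · simp only [List.map_cons, List.flatten_cons, String.toList_singleton]
      rw [List.nodup_append']
      refine ⟨List.nodup_singleton c0, ihnd, ?_⟩
      intro c hc hcf
      have : c = c0 := by simpa using hc
      subst this
      exact hnotin ((ihmem c).mp hcf)
    · intro c
      simp only [List.map_cons, List.flatten_cons, String.toList_singleton,
        List.mem_append, List.mem_cons, ihmem]
      constructor
      · rintro ((rfl | h0) | hr)
        · exact Or.inl rfl
        · cases h0
        · exact Or.inr hr
      · rintro (he | hr)
        · exact Or.inl (Or.inl (singleton_inj c c0 he))
        · exact Or.inr hr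

-- B's insertion-sort fold: permutation and sortedness of the initial work list
theorem buildSorted_perm (f : String → Int × String) :
    ∀ (l : List String) (ns : List (Int × String)),
    (l.foldl (fun ns c => insort (f c) ns) ns).Perm (ns ++ l.map f) := by
  intro l
  induction l with
  | nil => intro ns; simp
  | cons a r ih =>
    intro ns
    simp only [List.foldl_cons, List.map_cons]
    refine (ih (insort (f a) ns)).trans ?_
    refine (List.Perm.append_right _ (insort_perm (f a) ns)).trans ?_
    exact List.perm_middle.symm

theorem buildSorted_chain (f : String → Int × String) :
    ∀ (l : List String) (ns : List (Int × String)),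
    List.IsChain (fun a b => pyLt b a = false) ns →
    List.IsChain (fun a b => pyLt b a = false) (l.foldl (fun ns c => insort (f c) ns) ns) := by
  intro l
  induction l with
  | nil => intro ns h; exact h
  | cons a r ih =>
    intro ns h
    exact ih _ (insort_chain (f a) ns h)

theorem main_core (F : PySem.Dict String Int)
    (hkeysnd : F.keys.Nodup) (hsing : ∀ s ∈ F.keys, ∃ c, s = String.singleton c) :
    (F.keys.foldl
        (fun cb c => cb.insert c (traceAux
          ((mergeA (heapify ((F.keys.map (fun c => (F.getD c 0, c))).toArray)).size (heapify ((F.keys.map (fun c => (F.getD c 0, c))).toArray)) PySem.Dict.empty).size + 1)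
          (mergeA (heapify ((F.keys.map (fun c => (F.getD c 0, c))).toArray)).size (heapify ((F.keys.map (fun c => (F.getD c 0, c))).toArray)) PySem.Dict.empty)
          c ""))
        PySem.Dict.empty).items
    = (mergeB (F.keys.foldl (fun ns c => insort (F.getD c 0, c) ns) []).length
        (F.keys.foldl (fun ns c => insort (F.getD c 0, c) ns) [])
        (F.keys.foldl (fun k c => k.insert c "") PySem.Dict.empty)).items := by
  obtain ⟨csnd, csmem⟩ := singletons_facts F.keys hsing hkeysnd
  have hhp : (heapify ((F.keys.map (fun c => (F.getD c 0, c))).toArray)).toList.Perm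
      (F.keys.map (fun c => (F.getD c 0, c))) := by
    simpa using heapify_perm ((F.keys.map (fun c => (F.getD c 0, c))).toArray)
  have hnodes_perm : (F.keys.foldl (fun ns c => insort (F.getD c 0, c) ns) []).Perm
      (F.keys.map (fun c => (F.getD c 0, c))) := by
    simpa using buildSorted_perm (fun c => (F.getD c 0, c)) F.keys []
  have hN_chain : List.IsChain (fun a b => pyLt b a = false)
      (F.keys.foldl (fun ns c => insort (F.getD c 0, c) ns) []) :=
    buildSorted_chain (fun c => (F.getD c 0, c)) F.keys [] List.isChain_nil
  have hszH : (heapify ((F.keys.map (fun c => (F.getD c 0, c))).toArray)).size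
      = F.keys.length := by
    have := (heapify_perm ((F.keys.map (fun c => (F.getD c 0, c))).toArray)).length_eq
    simpa using this
  have hlenN : (F.keys.foldl (fun ns c => insort (F.getD c 0, c) ns) []).length
      = F.keys.length := by
    have := hnodes_perm.length_eq
    simpa using this
  have hinit : HInv ((F.keys.map String.toList).flatten) F.keys
      (F.keys.map (fun c => (F.getD c 0, c))) PySem.Dict.empty
      (F.keys.foldl (fun k c => k.insert c "") PySem.Dict.empty) := by
    have hk0 : ∀ x, (F.keys.foldl (fun k c => k.insert c "")
        (PySem.Dict.empty : PySem.Dict String String)).getD x "" = "" := by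
      intro x
      exact getD_emptyFold F.keys PySem.Dict.empty (fun y => PySem.Dict.getD_empty y "") x
    refine ⟨?_, ?_, ?_, ?_, ?_, ?_, ?_⟩
    · rw [List.map_map]
      exact List.Perm.refl _
    · intro e he c
      obtain ⟨sx, hsx, rfl⟩ := List.mem_map.mp he
      obtain ⟨c0, rfl⟩ := hsing sx hsx
      simp [String.toList_singleton] at c
    · intro e he c hc
      obtain ⟨sx, hsx, rfl⟩ := List.mem_map.mp he
      obtain ⟨c0, rfl⟩ := hsing sx hsx
      have hcc : c = c0 := by simpa [String.toList_singleton] using hc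
      subst hcc
      rw [hk0]
      exact HChain.base _ (PySem.Dict.get?_empty _)
    · intro pr hpr
      simp [show (PySem.Dict.empty : PySem.Dict String (Int × String)).items = [] from rfl] at hpr
    · intro p hp
      simp [show (PySem.Dict.empty : PySem.Dict String (Int × String)).keys = [] from rfl] at hp
    · rw [PySem.Dict.keys_foldl_insert F.keys (fun _ _ => "") PySem.Dict.empty]
      rw [show (PySem.Dict.empty : PySem.Dict String String).keys = [] from rfl]
      rw [PySem.Set.update_nil_left]
      exact PySem.Set.ofList_eq_self_of_nodup F.keys hkeysnd
    · intro e he c hc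
      obtain ⟨sx, hsx, rfl⟩ := List.mem_map.mp he
      obtain ⟨c0, rfl⟩ := hsing sx hsx
      have hcc : c = c0 := by simpa [String.toList_singleton] using hc
      subst hcc
      exact hsx
  have hinvN := hinv_perm _ _ _ _ _ _ hnodes_perm.symm hinit
  have hpermHN : (heapify ((F.keys.map (fun c => (F.getD c 0, c))).toArray)).toList.Perm
      (F.keys.foldl (fun ns c => insort (F.getD c 0, c) ns) []) :=
    hhp.trans hnodes_perm.symm
  have hfuel_eq : (F.keys.foldl (fun ns c => insort (F.getD c 0, c) ns) []).length
      = (heapify ((F.keys.map (fun c => (F.getD c 0, c))).toArray)).size := by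
    rw [hlenN, hszH]
  rw [hfuel_eq]
  have hmain := merge_rel (heapify ((F.keys.map (fun c => (F.getD c 0, c))).toArray)).size
    (heapify ((F.keys.map (fun c => (F.getD c 0, c))).toArray))
    (F.keys.foldl (fun ns c => insort (F.getD c 0, c) ns) [])
    PySem.Dict.empty
    (F.keys.foldl (fun k c => k.insert c "") PySem.Dict.empty)
    ((F.keys.map String.toList).flatten) F.keys
    rfl (by rw [hlenN, hszH]) csnd hpermHN
    (heapify_parents _) hN_chain hinvN
  obtain ⟨hchains, hTOK, hkeys⟩ := hmain
  have hLHS := PySem.Dict.items_foldl_insert_fresh F.keys (fun c => c)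
    (fun c => traceAux
      ((mergeA (heapify ((F.keys.map (fun c => (F.getD c 0, c))).toArray)).size (heapify ((F.keys.map (fun c => (F.getD c 0, c))).toArray)) PySem.Dict.empty).size + 1)
      (mergeA (heapify ((F.keys.map (fun c => (F.getD c 0, c))).toArray)).size (heapify ((F.keys.map (fun c => (F.getD c 0, c))).toArray)) PySem.Dict.empty)
      c "")
    PySem.Dict.empty
    (fun a _ => PySem.Dict.contains_empty a)
    (by simpa using hkeysnd)
  have hRHS := PySem.Dict.items_eq_map_keys
    (mergeB (heapify ((F.keys.map (fun c => (F.getD c 0, c))).toArray)).size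
      (F.keys.foldl (fun ns c => insort (F.getD c 0, c) ns) [])
      (F.keys.foldl (fun k c => k.insert c "") PySem.Dict.empty))
    (by rw [hkeys]; exact hkeysnd) ""
  rw [hLHS, hRHS, hkeys]
  rw [show ((PySem.Dict.empty : PySem.Dict String String)).items = [] from rfl,
    List.nil_append]
  refine List.map_congr_left ?_
  intro sx hsx
  obtain ⟨c0, rfl⟩ := hsing sx hsx
  have hc0 : c0 ∈ (F.keys.map String.toList).flatten := (csmem c0).mpr hsx
  obtain ⟨root, hch⟩ := hchains c0 hc0
  simp only []
  rw [trace_eq_code _ hTOK _ root _ hch]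

-- ===== VERDICT (by name: the statement is the Claim_ definition above) =====
theorem codebook_spec : Claim_equal_codebook := by
  intro data _
  unfold Spec_codebook codebook codebook_alt
  have hknd : (data.toList.foldl
      (fun d c => d.insert (String.singleton c) (d.getD (String.singleton c) 0 + 1))
      (PySem.Dict.empty : PySem.Dict String Int)).keys.Nodup := by
    refine PySem.Dict.nodup_keys_foldl_insert_key data.toList String.singleton _ PySem.Dict.empty ?_
    rw [show (PySem.Dict.empty : PySem.Dict String Int).keys = [] from rfl]
    exact List.nodup_nil
  have hsing : ∀ s ∈ (data.toList.foldl
      (fun d c => d.insert (String.singleton c) (d.getD (String.singleton c) 0 + 1))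
      (PySem.Dict.empty : PySem.Dict String Int)).keys, ∃ c, s = String.singleton c := by
    intro s hs
    rw [PySem.Dict.keys_foldl_insert_key data.toList String.singleton _ PySem.Dict.empty] at hs
    rw [show (PySem.Dict.empty : PySem.Dict String Int).keys = [] from rfl] at hs
    rw [PySem.Set.update_nil_left] at hs
    have := (PySem.Set.mem_ofList _ _).mp hs
    obtain ⟨c, _, rfl⟩ := List.mem_map.mp this
    exact ⟨c, rfl⟩
  exact main_core _ hknd hsing
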